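-- pv_equiv track=rewrite | github.com/rebeckao/AdventOfCode2021 | challenges/day_18_snailfish.py | explode
-- ===== SOURCE A (Python) =====
-- def add_explosion_result(number: str, value, coming_from_side) -> str:
--     if coming_from_side == 1:
--         for idx, char in enumerate(number):
--             if char.isdigit():
--                 steps_to_end_of_number = end_of_number(number[idx:])
--                 new_value = (int(number[idx:idx + steps_to_end_of_number]) + value)
--                 return number[0:idx] + str(new_value) + number[idx + steps_to_end_of_number:]
--     else:
--         for idx in range(len(number) - 1, -1, -1):
--             if number[idx].isdigit():
--                 steps_to_start_of_number = start_of_number(number[0:idx])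
--                 new_value = (int(number[steps_to_start_of_number: idx + 1]) + value)
--                 return number[0:steps_to_start_of_number] + str(new_value) + number[idx + 1:]
--     return number
--
-- def end_of_number(number):
--     for idx in range(0, len(number)):
--         if not number[idx].isdigit():
--             return idx
--
-- def start_of_number(number: str) -> int:
--     for idx in range(len(number) - 1, -1, -1):
--         if not number[idx].isdigit():
--             return idx + 1
--
-- def explode(number: str) -> str:
--     level = 0
--     for idx, char in enumerate(number):
--         if char == "[":
--             level += 1
--         elif char == "]":
--             level -= 1
--         elif char.isdigit() and level > 4:
--             steps_to_comma = number[idx:].index(",")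
--             steps_to_end_pair = number[idx:].index("]")
--             left_val = int(number[idx:idx + steps_to_comma])
--             right_val = int(number[idx + steps_to_comma + 1:idx + steps_to_end_pair])
--             left_side = add_explosion_result(number[0:idx - 1], left_val, 0)
--             right_side = add_explosion_result(number[idx + steps_to_end_pair + 1:], right_val, 1)
--             return f"{left_side}0{right_side}"
--     return number
-- ===== SOURCE B (Python) =====
-- DIGITS = "0123456789"
--
--
-- def _tokens(s):
--     """Split s into maximal digit runs and single non-digit characters."""
--     toks = []
--     i = 0
--     while i < len(s):
--         j = i
--         while j < len(s) and s[j] in DIGITS: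
--             j += 1
--         if j > i:
--             toks.append(s[i:j])
--             i = j
--         else:
--             toks.append(s[i])
--             i += 1
--     return toks
--
--
-- def explode(number: str) -> str:
--     toks = _tokens(number)
--     depth = 0
--     start = None
--     for i, tok in enumerate(toks):
--         if tok == "[":
--             depth += 1
--         elif tok == "]":
--             depth -= 1
--         elif tok[0] in DIGITS and depth > 4:
--             start = i
--             break
--     if start is None:
--         return number
--     if (start + 3 >= len(toks) or toks[start + 1] != ","
--             or toks[start + 2][0] not in DIGITS or toks[start + 3] != "]"):
--         return number  # no plain digit,digit pair closed by a bracket here: nothing to explode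
--     left_val = int(toks[start])
--     right_val = int(toks[start + 2])
--     left = toks[:start - 1]
--     right = toks[start + 4:]
--     for k in range(len(left) - 1, -1, -1):
--         if left[k][0] in DIGITS:
--             left[k] = str(int(left[k]) + left_val)
--             break
--     for k in range(len(right)):
--         if right[k][0] in DIGITS:
--             right[k] = str(int(right[k]) + right_val)
--             break
--     return "".join(left) + "0" + "".join(right)
-- ===== Notes on version B (the rewrite author's own statement) =====
-- stated objective: alternative
-- what changed: B tokenizes the string into maximal digit runs and single characters, finds the first numeric token at depth > 4 in one pass over the tokens, and edits the token list (add to last/first numeric token, drop the pair's tokens) before joining, instead of A's per-character scan with index arithmetic, slicing and substring .index calls.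
-- intended difference: On inputs whose first deep pair is preceded by a digit run starting at position 0 of the string (Python's start_of_number returns None), A splices with a None slice bound and returns a garbled string that repeats the whole left part, while B adds the left value to that run as intended. — e.g. on explode("7[[[[[8,9]]]]]"): A returns "7[[[[15[[[[0]]]]", B returns "15[[[[0]]]]"
-- outside the precondition, e.g. on explode('[[[[[12 ,3],1],2],3],4]'): A returns '[[[[0,4],2],3],4]', B returns '[[[[[12 ,3],1],2],3],4]'
import Mathlib
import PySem

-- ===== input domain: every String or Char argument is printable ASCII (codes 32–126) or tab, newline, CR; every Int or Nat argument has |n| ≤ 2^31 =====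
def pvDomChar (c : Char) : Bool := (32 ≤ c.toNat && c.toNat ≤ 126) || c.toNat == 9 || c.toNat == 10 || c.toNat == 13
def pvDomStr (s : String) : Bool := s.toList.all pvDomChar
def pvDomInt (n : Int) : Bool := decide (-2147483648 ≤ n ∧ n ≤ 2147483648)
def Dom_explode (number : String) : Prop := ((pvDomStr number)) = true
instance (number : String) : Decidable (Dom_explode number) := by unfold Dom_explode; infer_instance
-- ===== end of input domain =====

set_option maxRecDepth 10000


-- B re-implements the explode step by tokenizing the string into digit runs and single
-- characters and editing the token list, instead of A's per-character index/slice surgery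
-- (objective: alternative; same asymptotic cost).

-- ===== PORT A =====

-- helper end_of_number: first index of a non-digit, None if all digits (Python falls off the loop)
def endOfNumber : List Char → Option Nat
  | [] => none
  | c :: t => if PySem.Chars.isdigit c then (endOfNumber t).map (· + 1) else some 0

-- helper start_of_number, ported on the REVERSED prefix: n = current idx+1, scanning right-to-left
def sonRev : List Char → Nat → Option Nat
  | [], _ => none
  | c :: t, n => if PySem.Chars.isdigit c then sonRev t (n - 1) else some n

-- add_explosion_result, coming_from_side == 1 (forward scan); pre = number[0:idx]
def aerFwd (pre : List Char) (rest : List Char) (v : Int) : List Char :=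
  match rest with
  | [] => pre  -- loop falls through: return number (= pre ++ [])
  | c :: t =>
    if PySem.Chars.isdigit c then
      match endOfNumber (c :: t) with
      | none => pre ++ c :: t  -- Python raises TypeError here (idx + None); outside Pre_
      | some e =>
        pre ++ PySem.Int.toChars ((PySem.Int.ofChars? ((c :: t).take e)).getD 0 + v)
            ++ (c :: t).drop e
    else aerFwd (pre ++ [c]) t v

-- add_explosion_result, coming_from_side == 0 (backward index loop over idxs = [n-1,...,0])
def aerBwdGo (number : List Char) (v : Int) : List Nat → List Char
  | [] => number
  | idx :: rest =>
    if PySem.Chars.isdigit (number.getD idx ' ') then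
      match sonRev (number.take idx).reverse idx with
      | none =>
        -- Python: steps_to_start_of_number is None; number[0:None] is the whole string,
        -- number[None:idx+1] is number[0:idx+1] — ported exactly
        number ++ PySem.Int.toChars ((PySem.Int.ofChars? (number.take (idx + 1))).getD 0 + v)
               ++ number.drop (idx + 1)
      | some st =>
        number.take st
          ++ PySem.Int.toChars ((PySem.Int.ofChars? ((number.take (idx + 1)).drop st)).getD 0 + v)
          ++ number.drop (idx + 1)
    else aerBwdGo number v rest

def addExplosionResult (number : List Char) (v : Int) (side : Int) : List Char :=
  if side == 1 then aerFwd [] number v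
  else aerBwdGo number v (List.range number.length).reverse

-- explode's main loop: rest = number[idx:], level as in Python
def explodeGo (number : List Char) (rest : List Char) (idx : Nat) (level : Int) : List Char :=
  match rest with
  | [] => number
  | c :: t =>
    if c == '[' then explodeGo number t (idx + 1) (level + 1)
    else if c == ']' then explodeGo number t (idx + 1) (level - 1)
    else if PySem.Chars.isdigit c && decide (4 < level) then
      let sc := PySem.Chars.find (number.drop idx) [',']   -- number[idx:].index(",")
      let sep := PySem.Chars.find (number.drop idx) [']']  -- number[idx:].index("]")
      if sc < 0 || sep < 0 then number  -- Python raises ValueError; outside Pre_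
      else
        let leftVal := (PySem.Int.ofChars? ((number.drop idx).take sc.toNat)).getD 0
        let rightVal :=
          (PySem.Int.ofChars? (((number.drop idx).take sep.toNat).drop (sc.toNat + 1))).getD 0
        let leftSide := addExplosionResult (number.take (idx - 1)) leftVal 0
        let rightSide := addExplosionResult ((number.drop idx).drop (sep.toNat + 1)) rightVal 1
        leftSide ++ '0' :: rightSide
    else explodeGo number t (idx + 1) level

def explode (number : String) : String :=
  String.ofList (explodeGo number.toList number.toList 0 0)

-- ===== PORT B =====

-- _tokens: maximal digit runs and single non-digit characters; the fuel argument ports the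
-- 'while i < len(s)' loop (len(s) iterations always suffice) and keeps the definition
-- kernel-reducible
def tokGo : Nat → List Char → List (List Char)
  | 0, _ => []
  | _, [] => []
  | fuel + 1, c :: t =>
    if PySem.Chars.isdigit c then
      (c :: t.takeWhile PySem.Chars.isdigit) :: tokGo fuel (t.dropWhile PySem.Chars.isdigit)
    else [c] :: tokGo fuel t

def tokenize (cs : List Char) : List (List Char) := tokGo cs.length cs

-- tok[0] in DIGITS (tokens are never empty; [] defaults to false)
def headDg : List Char → Bool
  | [] => false
  | c :: _ => PySem.Chars.isdigit c

-- the scan for the first numeric token at depth > 4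
def findStart : List (List Char) → Nat → Int → Option Nat
  | [], _, _ => none
  | t :: rest, i, depth =>
    if t == ['['] then findStart rest (i + 1) (depth + 1)
    else if t == [']'] then findStart rest (i + 1) (depth - 1)
    else if headDg t && decide (4 < depth) then some i
    else findStart rest (i + 1) depth

-- add right_val to the first numeric token
def addFirstTok : List (List Char) → Int → List (List Char)
  | [], _ => []
  | t :: r, v =>
    if headDg t then PySem.Int.toChars ((PySem.Int.ofChars? t).getD 0 + v) :: r
    else t :: addFirstTok r v

-- add left_val to the last numeric token: the backward loop, run on the reversed list
def addLastRev : List (List Char) → Int → List (List Char)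
  | [], _ => []
  | t :: r, v =>
    if headDg t then PySem.Int.toChars ((PySem.Int.ofChars? t).getD 0 + v) :: r
    else t :: addLastRev r v

def addLastTok (toks : List (List Char)) (v : Int) : List (List Char) :=
  (addLastRev toks.reverse v).reverse

def explodeAltGo (cs : List Char) : List Char :=
  let toks := tokenize cs
  match findStart toks 0 0 with
  | none => cs
  | some s =>
    if decide (s + 3 < toks.length) && (toks.getD (s + 1) [] == [','])
        && headDg (toks.getD (s + 2) []) && (toks.getD (s + 3) [] == [']']) then
      let leftVal := (PySem.Int.ofChars? (toks.getD s [])).getD 0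
      let rightVal := (PySem.Int.ofChars? (toks.getD (s + 2) [])).getD 0
      let left := addLastTok (toks.take (s - 1)) leftVal
      let right := addFirstTok (toks.drop (s + 4)) rightVal
      PySem.Chars.join [] left ++ '0' :: PySem.Chars.join [] right
    else cs  -- no plain digit,digit pair closed by a bracket at the trigger: nothing to explode

def explode_alt (number : String) : String :=
  String.ofList (explodeAltGo number.toList)

-- ===== PRECONDITION & SPEC =====

-- bracket depth of the prefix number[0:i]
def depthAt (cs : List Char) (i : Nat) : Int :=
  ((cs.take i).count '[' : Int) - ((cs.take i).count ']' : Int)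

-- character i is a digit lying at depth > 4 (the explode trigger)
abbrev trigAt (cs : List Char) (i : Nat) : Prop :=
  PySem.Chars.isdigit (cs.getD i ' ') = true ∧ 4 < depthAt cs i

-- the text after the exploded pair: Python raises TypeError iff the first digit run of S
-- runs to the very end of S (end_of_number returns None)
abbrev rightOk (S : List Char) : Prop :=
  ¬ ∃ j < S.length, PySem.Chars.isdigit (S.getD j ' ') = true ∧
      (∀ t < j, PySem.Chars.isdigit (S.getD t ' ') = false) ∧
      (∀ k, j ≤ k → k < S.length → PySem.Chars.isdigit (S.getD k ' ') = true)

-- Pre_ excludes the inputs where A raises at the trigger (no "," or "]" after it, an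
-- unparsable or empty slice, or a right side whose first digit run reaches the end of the
-- string, TypeError), and the inputs where A only returns because int() leniently parses a
-- pair slice that is not a plain digit run (whitespace/sign/underscore), which no token-based
-- reading reproduces: it demands that the first deep digit starts a pair of plain digit runs
-- separated by a comma and closed by a bracket.
def Pre_explode (number : String) : Prop :=
  ∀ p ∈ number.toList.zipIdx,
    (PySem.Chars.isdigit p.1 = true ∧ 4 < depthAt number.toList p.2 ∧
      ∀ j < p.2, ¬ trigAt number.toList j) →
    ∃ la < number.toList.length, ∃ lb < number.toList.length,
      0 < la ∧ 0 < lb ∧ p.2 + la + lb + 2 ≤ number.toList.length ∧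
      (∀ k, p.2 ≤ k → k < p.2 + la → PySem.Chars.isdigit (number.toList.getD k ' ') = true) ∧
      number.toList.getD (p.2 + la) ' ' = ',' ∧
      (∀ k, p.2 + la + 1 ≤ k → k < p.2 + la + 1 + lb →
        PySem.Chars.isdigit (number.toList.getD k ' ') = true) ∧
      number.toList.getD (p.2 + la + 1 + lb) ' ' = ']' ∧
      rightOk (number.toList.drop (p.2 + la + lb + 2))

instance (number : String) : Decidable (Pre_explode number) := by
  unfold Pre_explode; infer_instance

def pvWitness_explode : String := "[[[[[1,2]"

-- On inputs whose first digit at bracket depth > 4 (position i) has, strictly to its left,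
-- digits forming exactly one nonempty run that starts at position 0 of the string (so
-- Python's start_of_number returns None), A splices with a None bound and returns a garbled
-- string that repeats the whole left part, while B adds the left value to that run as
-- intended.
def D_explode (number : String) : Prop :=
  number.toList.takeWhile PySem.Chars.isdigit ≠ [] ∧
  ((number.toList.dropWhile PySem.Chars.isdigit).dropWhile
      (fun c => ! PySem.Chars.isdigit c)) ≠ [] ∧
  4 < ((((number.toList.dropWhile PySem.Chars.isdigit).takeWhile
          (fun c => ! PySem.Chars.isdigit c)).count '[' : Int)
      - (((number.toList.dropWhile PySem.Chars.isdigit).takeWhile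
          (fun c => ! PySem.Chars.isdigit c)).count ']' : Int))

instance (number : String) : Decidable (D_explode number) := by
  unfold D_explode; infer_instance

def Spec_explode (number : String) (out : String) : Prop :=
  ¬ D_explode number → out = explode_alt number

instance (number : String) (out : String) : Decidable (Spec_explode number out) := by
  unfold Spec_explode; infer_instance

def pvDiffWitness_explode : String := "7[[[[[8,9]]]]]"

def pvDiffWitnessOut_explode : String × String := ("7[[[[15[[[[0]]]]", "15[[[[0]]]]")

-- ===== CLAIM (what is proved, stated in full; the proofs are below) =====
def Claim_unchanged_explode : Prop :=
  ∀ (number : String), Dom_explode number → Pre_explode number →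
    Spec_explode number (explode number)

def Claim_changed_explode : Prop :=
  Dom_explode (pvDiffWitness_explode) ∧ Pre_explode (pvDiffWitness_explode) ∧
    D_explode (pvDiffWitness_explode) ∧
    explode (pvDiffWitness_explode) = pvDiffWitnessOut_explode.1 ∧
    explode_alt (pvDiffWitness_explode) = pvDiffWitnessOut_explode.2 ∧
    pvDiffWitnessOut_explode.1 ≠ pvDiffWitnessOut_explode.2

def Claim_exact_explode : Prop :=
  ∀ (number : String), Dom_explode number → Pre_explode number → D_explode number →
    explode number ≠ explode_alt number

-- ===== LEMMAS AND PROOFS =====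

-- shorthand predicates used only by the proofs
def allDg (l : List Char) : Prop := ∀ c ∈ l, PySem.Chars.isdigit c = true
def noDg (l : List Char) : Prop := ∀ c ∈ l, PySem.Chars.isdigit c = false

-- "the digits of L form one nonempty run starting at position 0" (the shape on which
-- Python's start_of_number returns None)
def badL (L : List Char) : Prop := ∃ R T, L = R ++ T ∧ R ≠ [] ∧ allDg R ∧ noDg T

-- the value the A port computes once its loop hits the first trigger at index idx
def trigBody (cs : List Char) (idx : Nat) : List Char :=
  let sc := PySem.Chars.find (cs.drop idx) [',']
  let sep := PySem.Chars.find (cs.drop idx) [']']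
  if sc < 0 || sep < 0 then cs
  else
    addExplosionResult (cs.take (idx - 1))
        ((PySem.Int.ofChars? ((cs.drop idx).take sc.toNat)).getD 0) 0
      ++ '0' :: addExplosionResult ((cs.drop idx).drop (sep.toNat + 1))
        ((PySem.Int.ofChars? (((cs.drop idx).take sep.toNat).drop (sc.toNat + 1))).getD 0) 1

-- ---------- characters ----------

theorem dg_ne_lb {c : Char} (h : PySem.Chars.isdigit c = true) : c ≠ '[' := by
  rintro rfl; simp [PySem.Chars.isdigit] at h

theorem dg_ne_rb {c : Char} (h : PySem.Chars.isdigit c = true) : c ≠ ']' := by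
  rintro rfl; simp [PySem.Chars.isdigit] at h

theorem dg_ne_comma {c : Char} (h : PySem.Chars.isdigit c = true) : c ≠ ',' := by
  rintro rfl; simp [PySem.Chars.isdigit] at h

theorem getLast?_cons_ne {c : Char} {t : List Char} (h : t ≠ []) :
    (c :: t).getLast? = t.getLast? := by
  cases t with
  | nil => exact absurd rfl h
  | cons u r => simp [List.getLast?_cons_cons]

-- ---------- getD glue ----------

theorem getD_append_left {α : Type} {d : α} {l l' : List α} {n : Nat} (h : n < l.length) :
    (l ++ l').getD n d = l.getD n d := by
  simp [List.getD_eq_getElem?_getD, List.getElem?_append_left h]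

theorem getD_append_right {α : Type} {d : α} {l l' : List α} {n : Nat} (h : l.length ≤ n) :
    (l ++ l').getD n d = l'.getD (n - l.length) d := by
  simp [List.getD_eq_getElem?_getD, List.getElem?_append_right h]

theorem getD_take {α : Type} {d : α} {l : List α} {n k : Nat} (h : k < n) :
    (l.take n).getD k d = l.getD k d := by
  simp [List.getD_eq_getElem?_getD, List.getElem?_take_of_lt h]

theorem getD_drop {α : Type} {d : α} {l : List α} {n k : Nat} :
    (l.drop n).getD k d = l.getD (n + k) d := by
  simp [List.getD_eq_getElem?_getD]

theorem getD_of_getElem {α : Type} {d : α} {l : List α} {n : Nat} (h : n < l.length) :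
    l.getD n d = l[n] := List.getD_eq_getElem l d h

theorem drop_eq_getD_cons {l : List Char} {n : Nat} (h : n < l.length) :
    l.drop n = l.getD n ' ' :: l.drop (n + 1) := by
  rw [List.drop_eq_getElem_cons h, getD_of_getElem h]

theorem drop_append_len {α : Type} {l l' : List α} {n : Nat} (h : l.length ≤ n) :
    (l ++ l').drop n = l'.drop (n - l.length) := by
  rw [List.drop_append]; simp [List.drop_eq_nil_of_le h]

-- ---------- tokenizer ----------

theorem tokGo_congr : ∀ (f g : Nat) (cs : List Char), cs.length ≤ f → cs.length ≤ g →
    tokGo f cs = tokGo g cs := by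
  intro f
  induction f with
  | zero => intro g cs hf _; rw [Nat.le_zero, List.length_eq_zero_iff] at hf; subst hf
            cases g <;> rfl
  | succ f ih =>
    intro g cs hf hg
    cases cs with
    | nil => cases g <;> rfl
    | cons c t =>
      cases g with
      | zero => simp at hg
      | succ g =>
        simp only [tokGo]
        have hle := List.length_dropWhile_le (p := PySem.Chars.isdigit) (l := t)
        by_cases hd : PySem.Chars.isdigit c = true
        · rw [if_pos hd, if_pos hd,
            ih g (t.dropWhile PySem.Chars.isdigit)
              (le_trans hle (by simpa using hf)) (le_trans hle (by simpa using hg))]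
        · rw [if_neg hd, if_neg hd, ih g t (by simpa using hf) (by simpa using hg)]

theorem tokenize_nil : tokenize [] = [] := rfl

theorem tokenize_cons_dg {c : Char} {t : List Char} (h : PySem.Chars.isdigit c = true) :
    tokenize (c :: t) =
      (c :: t.takeWhile PySem.Chars.isdigit) :: tokenize (t.dropWhile PySem.Chars.isdigit) := by
  show tokGo (t.length + 1) (c :: t) = _
  simp only [tokGo, h, if_true]
  rw [tokGo_congr t.length (t.dropWhile PySem.Chars.isdigit).length _
    (List.length_dropWhile_le _ _) le_rfl]
  rfl

theorem tokenize_cons_ndg {c : Char} {t : List Char} (h : PySem.Chars.isdigit c = false) :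
    tokenize (c :: t) = [c] :: tokenize t := by
  show tokGo (t.length + 1) (c :: t) = _
  simp only [tokGo, h]
  rfl

theorem flatten_tokenize : ∀ n (cs : List Char), cs.length ≤ n → (tokenize cs).flatten = cs := by
  intro n
  induction n with
  | zero => intro cs h; rw [Nat.le_zero, List.length_eq_zero_iff] at h; subst h; rfl
  | succ n ih =>
    intro cs h
    cases cs with
    | nil => rfl
    | cons c t =>
      by_cases hd : PySem.Chars.isdigit c = true
      · rw [tokenize_cons_dg hd]
        simp only [List.flatten_cons]
        rw [ih _ (le_trans (List.length_dropWhile_le _ _) (by simpa using h))]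
        simp [List.takeWhile_append_dropWhile]
      · rw [tokenize_cons_ndg (by simpa using hd)]
        simp only [List.flatten_cons]
        rw [ih _ (by simpa using h)]
        rfl

theorem flatten_tokenize' (cs : List Char) : (tokenize cs).flatten = cs :=
  flatten_tokenize cs.length cs le_rfl

theorem join_nil_flatten (l : List (List Char)) : PySem.Chars.join [] l = l.flatten := by
  induction l with
  | nil => rfl
  | cons a t ih =>
    cases t with
    | nil => simp [PySem.Chars.join, List.intercalate]
    | cons b r =>
      rw [PySem.Chars.join_cons_cons, ih]
      simp

theorem tokenize_append : ∀ n (Y Z : List Char), Y.length ≤ n →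
    ((∀ a, Y.getLast? = some a → PySem.Chars.isdigit a = false) ∨
     (∀ b, Z.head? = some b → PySem.Chars.isdigit b = false)) →
    tokenize (Y ++ Z) = tokenize Y ++ tokenize Z := by
  intro n
  induction n with
  | zero => intro Y Z h _; rw [Nat.le_zero, List.length_eq_zero_iff] at h; subst h; rfl
  | succ n ih =>
    intro Y Z h hb
    cases Y with
    | nil => rfl
    | cons c t =>
      by_cases hd : PySem.Chars.isdigit c = true
      · have hsplit := List.takeWhile_append_dropWhile (p := PySem.Chars.isdigit) (l := t)
        by_cases htd : t.dropWhile PySem.Chars.isdigit = []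
        · -- c :: t is all digits; Z must start with a non-digit (or be empty)
          have htall : t.takeWhile PySem.Chars.isdigit = t := by
            rw [htd] at hsplit; simpa using hsplit
          have hall : allDg (c :: t) := by
            intro y hy
            rcases List.mem_cons.mp hy with rfl | hy'
            · exact hd
            · rw [← htall] at hy'; exact List.mem_takeWhile_imp hy'
          have hZ : ∀ b, Z.head? = some b → PySem.Chars.isdigit b = false := by
            rcases hb with hY | hZ
            · exfalso
              have hlast := List.getLast?_eq_some_getLast (l := c :: t) (by simp)
              have hfalse := hY _ hlast
              have htrue := hall _ (List.getLast_mem (by simp))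
              rw [hfalse] at htrue; cases htrue
            · exact hZ
          have htkZ : Z.takeWhile PySem.Chars.isdigit = [] := by
            cases Z with
            | nil => rfl
            | cons z r =>
              have := hZ z rfl
              simp [List.takeWhile, this]
          have hdwZ : Z.dropWhile PySem.Chars.isdigit = Z := by
            cases Z with
            | nil => rfl
            | cons z r =>
              have := hZ z rfl
              simp [List.dropWhile, this]
          rw [List.cons_append, tokenize_cons_dg hd, tokenize_cons_dg hd]
          rw [List.takeWhile_append, List.dropWhile_append]
          simp [htall, htd, htkZ, hdwZ, tokenize_nil]
        · -- t contains a non-digit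
          have htk : (t ++ Z).takeWhile PySem.Chars.isdigit = t.takeWhile PySem.Chars.isdigit := by
            rw [List.takeWhile_append]
            have : (t.takeWhile PySem.Chars.isdigit).length ≠ t.length := by
              intro hc
              apply htd
              have hlen : (t.takeWhile PySem.Chars.isdigit).length
                  + (t.dropWhile PySem.Chars.isdigit).length = t.length := by
                rw [← List.length_append, hsplit]
              have h0 : (t.dropWhile PySem.Chars.isdigit).length = 0 := by omega
              exact List.length_eq_zero_iff.mp h0
            simp [this]
          have hdw : (t ++ Z).dropWhile PySem.Chars.isdigit = t.dropWhile PySem.Chars.isdigit ++ Z := by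
            rw [List.dropWhile_append]
            simp [htd]
          rw [List.cons_append, tokenize_cons_dg hd, tokenize_cons_dg hd, htk, hdw]
          rw [ih (t.dropWhile PySem.Chars.isdigit) Z
            (le_trans (List.length_dropWhile_le _ _) (by simpa using h)) ?cond]
          case cond =>
            rcases hb with hY | hZ
            · left; intro a ha
              apply hY
              have hne : t ≠ [] := by rintro rfl; simp at htd
              have hsuff : t.dropWhile PySem.Chars.isdigit <:+ t := List.dropWhile_suffix _
              rw [getLast?_cons_ne hne]
              obtain ⟨pre, hpre⟩ := hsuff
              rw [← hpre, List.getLast?_append_of_ne_nil pre htd]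
              exact ha
            · right; exact hZ
          simp
      · have hd' : PySem.Chars.isdigit c = false := by simpa using hd
        rw [List.cons_append, tokenize_cons_ndg hd', tokenize_cons_ndg hd']
        rw [ih t Z (by simpa using h) ?cond2]
        case cond2 =>
          rcases hb with hY | hZ
          · cases t with
            | nil => left; intro a ha; simp at ha
            | cons u r =>
              left; intro a ha; apply hY
              rwa [getLast?_cons_ne (by simp)]
          · right; exact hZ
        simp

-- tokenizing a digit run followed by text that does not start with a digit
theorem tokenize_run {R Z : List Char} (hR : allDg R) (hne : R ≠ [])
    (hz : ∀ b, Z.head? = some b → PySem.Chars.isdigit b = false) :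
    tokenize (R ++ Z) = R :: tokenize Z := by
  cases R with
  | nil => cases hne rfl
  | cons c t =>
    have hd : PySem.Chars.isdigit c = true := hR c (by simp)
    rw [List.cons_append, tokenize_cons_dg hd]
    have htall : ∀ x ∈ t, PySem.Chars.isdigit x = true := fun x hx => hR x (by simp [hx])
    have htk : (t ++ Z).takeWhile PySem.Chars.isdigit = t := by
      rw [List.takeWhile_append]
      have h1 : t.takeWhile PySem.Chars.isdigit = t := List.takeWhile_eq_self_iff.mpr htall
      have htkZ : Z.takeWhile PySem.Chars.isdigit = [] := by
        cases Z with
        | nil => rfl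
        | cons z r => simp [List.takeWhile, hz z rfl]
      simp [h1, htkZ]
    have hdw : (t ++ Z).dropWhile PySem.Chars.isdigit = Z := by
      rw [List.dropWhile_append]
      have h1 : t.dropWhile PySem.Chars.isdigit = [] := by
        simp [List.dropWhile_eq_nil_iff]; exact fun x hx => htall x hx
      have hdwZ : Z.dropWhile PySem.Chars.isdigit = Z := by
        cases Z with
        | nil => rfl
        | cons z r => simp [List.dropWhile, hz z rfl]
      simp [h1, hdwZ]
    rw [htk, hdw]

theorem tokenize_noDg {T : List Char} (h : noDg T) :
    tokenize T = T.map (fun c => [c]) := by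
  induction T with
  | nil => rfl
  | cons c t ih =>
    rw [tokenize_cons_ndg (h c (by simp))]
    rw [ih (fun x hx => h x (by simp [hx]))]
    rfl

theorem tokenize_singleton_ndg {x : Char} (h : PySem.Chars.isdigit x = false) :
    tokenize [x] = [[x]] := by
  rw [tokenize_cons_ndg h]; rfl

-- ---------- depth ----------

theorem depthAt_zero (cs : List Char) : depthAt cs 0 = 0 := by simp [depthAt]

theorem depthAt_succ {cs : List Char} {i : Nat} (h : i < cs.length) :
    depthAt cs (i + 1) = depthAt cs i +
      (if cs.getD i ' ' = '[' then 1 else if cs.getD i ' ' = ']' then (-1 : Int) else 0) := by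
  unfold depthAt
  rw [List.take_succ_eq_append_getElem h, List.count_append, List.count_append,
    getD_of_getElem h]
  by_cases h1 : cs[i] = '['
  · simp [h1, List.count_singleton]; ring
  · by_cases h2 : cs[i] = ']'
    · simp [h1, h2, List.count_singleton]; push_cast; ring
    · simp [List.count_singleton, Ne.symm h1, Ne.symm h2, h1, h2]

theorem depthAt_append_add {Y Z : List Char} (j : Nat) :
    depthAt (Y ++ Z) (Y.length + j) = depthAt Y Y.length + depthAt Z j := by
  unfold depthAt
  rw [List.take_append, List.take_of_length_le (by omega), show Y.length + j - Y.length = j by omega]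
  simp [List.count_append]
  push_cast; ring

theorem depthAt_allDg {R : List Char} (h : allDg R) (k : Nat) : depthAt R k = 0 := by
  unfold depthAt
  have h1 : (R.take k).count '[' = 0 := by
    rw [List.count_eq_zero]
    intro hc
    have := h '[' (List.mem_of_mem_take hc)
    simp [PySem.Chars.isdigit] at this
  have h2 : (R.take k).count ']' = 0 := by
    rw [List.count_eq_zero]
    intro hc
    have := h ']' (List.mem_of_mem_take hc)
    simp [PySem.Chars.isdigit] at this
  simp [h1, h2]

-- ---------- trigger facts ----------

theorem trig_pos {cs : List Char} {i : Nat} (h : trigAt cs i) : 1 ≤ i := by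
  rcases Nat.eq_zero_or_pos i with rfl | hp
  · exfalso; have := h.2; rw [depthAt_zero] at this; omega
  · exact hp

theorem prev_not_dg {cs : List Char} {i : Nat} (hi : i < cs.length)
    (ht : trigAt cs i) (hmin : ∀ j < i, ¬ trigAt cs j) :
    PySem.Chars.isdigit (cs.getD (i - 1) ' ') = false := by
  have h1 : 1 ≤ i := trig_pos ht
  by_contra hdig
  rw [Bool.not_eq_false] at hdig
  apply hmin (i - 1) (by omega)
  refine ⟨hdig, ?_⟩
  have hlt : i - 1 < cs.length := by omega
  have := depthAt_succ hlt
  have hne1 : cs.getD (i - 1) ' ' ≠ '[' := dg_ne_lb hdig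
  have hne2 : cs.getD (i - 1) ' ' ≠ ']' := dg_ne_rb hdig
  rw [if_neg hne1, if_neg hne2] at this
  have h2 := ht.2
  rw [show i - 1 + 1 = i by omega] at this
  omega

theorem dropWhile_head_false {p : Char → Bool} : ∀ {t : List Char} {x : Char} {r : List Char},
    t.dropWhile p = x :: r → p x = false := by
  intro t
  induction t with
  | nil => intro x r h; cases h
  | cons c u ih =>
    intro x r h
    by_cases hc : p c = true
    · rw [List.dropWhile_cons_of_pos hc] at h; exact ih h
    · rw [List.dropWhile_cons_of_neg hc] at h
      injection h with h1 _
      subst h1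
      simpa using hc

theorem dropWhile_head_ndg {t : List Char} {x : Char} {r : List Char}
    (h : t.dropWhile PySem.Chars.isdigit = x :: r) : PySem.Chars.isdigit x = false :=
  dropWhile_head_false h

theorem flatten_map_singleton (T : List Char) : (T.map (fun c => [c])).flatten = T := by
  induction T with
  | nil => rfl
  | cons c t ih => simp [ih]

-- ---------- the A-side scan ----------

theorem explodeGo_step {cs : List Char} : ∀ (rest : List Char) (idx : Nat),
    rest = cs.drop idx → idx ≤ cs.length →
    (∀ j, idx ≤ j → j < cs.length → ¬ trigAt cs j) →
    explodeGo cs rest idx (depthAt cs idx) = cs := by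
  intro rest
  induction rest with
  | nil => intro idx _ _ _; rfl
  | cons c t ih =>
    intro idx hrest hle hno
    have hidx : idx < cs.length := by
      by_contra hc
      rw [List.drop_eq_nil_of_le (by omega)] at hrest
      cases hrest
    have hc0 : cs.getD idx ' ' = c := by
      have := List.drop_eq_getElem_cons hidx
      rw [← hrest] at this
      have : cs[idx] = c := by injection this with h1 _; exact h1.symm
      rw [getD_of_getElem hidx, this]
    have ht : t = cs.drop (idx + 1) := by
      have h3 := List.drop_eq_getElem_cons hidx
      rw [← hrest] at h3
      have h4 := congrArg List.tail h3
      simpa using h4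
    simp only [explodeGo]
    by_cases h1 : c = '['
    · subst h1
      rw [if_pos (by simp)]
      have hd : depthAt cs idx + 1 = depthAt cs (idx + 1) := by
        rw [depthAt_succ hidx, hc0, if_pos rfl]
      rw [hd]
      exact ih (idx + 1) ht (by omega) (fun j hj1 hj2 => hno j (by omega) hj2)
    · rw [if_neg (by simpa using h1)]
      by_cases h2 : c = ']'
      · subst h2
        rw [if_pos (by simp)]
        have hd : depthAt cs idx - 1 = depthAt cs (idx + 1) := by
          rw [depthAt_succ hidx, hc0, if_neg (by decide), if_pos rfl]
          omega
        rw [hd]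
        exact ih (idx + 1) ht (by omega) (fun j hj1 hj2 => hno j (by omega) hj2)
      · rw [if_neg (by simpa using h2)]
        have hnotrig : ¬ (PySem.Chars.isdigit c && decide (4 < depthAt cs idx)) = true := by
          intro hcontra
          simp only [Bool.and_eq_true, decide_eq_true_eq] at hcontra
          exact hno idx le_rfl hidx ⟨by rw [hc0]; exact hcontra.1, hcontra.2⟩
        rw [if_neg hnotrig]
        have hd : depthAt cs idx = depthAt cs (idx + 1) := by
          rw [depthAt_succ hidx, hc0, if_neg h1, if_neg h2]
          ring
        rw [hd]
        exact ih (idx + 1) ht (by omega) (fun j hj1 hj2 => hno j (by omega) hj2)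

theorem explodeGo_trig {cs : List Char} {i : Nat} (hi : i < cs.length)
    (htr : trigAt cs i) : ∀ (rest : List Char) (idx : Nat),
    rest = cs.drop idx → idx ≤ i →
    (∀ j, idx ≤ j → j < i → ¬ trigAt cs j) →
    explodeGo cs rest idx (depthAt cs idx) = trigBody cs i := by
  intro rest
  induction rest with
  | nil =>
    intro idx hrest hle _
    exfalso
    have : cs.length ≤ idx := by
      by_contra hc
      rw [List.drop_eq_getElem_cons (by omega)] at hrest
      cases hrest
    omega
  | cons c t ih =>
    intro idx hrest hle hno
    have hidx : idx < cs.length := by omega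
    have hc0 : cs.getD idx ' ' = c := by
      have := List.drop_eq_getElem_cons hidx
      rw [← hrest] at this
      have : cs[idx] = c := by injection this with h1 _; exact h1.symm
      rw [getD_of_getElem hidx, this]
    have ht : t = cs.drop (idx + 1) := by
      have h3 := List.drop_eq_getElem_cons hidx
      rw [← hrest] at h3
      have h4 := congrArg List.tail h3
      simpa using h4
    rcases Nat.lt_or_ge idx i with hlt | hge
    · -- still before the trigger: step like explodeGo_step
      simp only [explodeGo]
      by_cases h1 : c = '['
      · subst h1
        rw [if_pos (by simp)]
        have hd : depthAt cs idx + 1 = depthAt cs (idx + 1) := by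
          rw [depthAt_succ hidx, hc0, if_pos rfl]
        rw [hd]
        exact ih (idx + 1) ht (by omega) (fun j hj1 hj2 => hno j (by omega) hj2)
      · rw [if_neg (by simpa using h1)]
        by_cases h2 : c = ']'
        · subst h2
          rw [if_pos (by simp)]
          have hd : depthAt cs idx - 1 = depthAt cs (idx + 1) := by
            rw [depthAt_succ hidx, hc0, if_neg (by decide), if_pos rfl]
            omega
          rw [hd]
          exact ih (idx + 1) ht (by omega) (fun j hj1 hj2 => hno j (by omega) hj2)
        · rw [if_neg (by simpa using h2)]
          have hnotrig : ¬ (PySem.Chars.isdigit c && decide (4 < depthAt cs idx)) = true := by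
            intro hcontra
            simp only [Bool.and_eq_true, decide_eq_true_eq] at hcontra
            exact hno idx le_rfl hlt ⟨by rw [hc0]; exact hcontra.1, hcontra.2⟩
          rw [if_neg hnotrig]
          have hd : depthAt cs idx = depthAt cs (idx + 1) := by
            rw [depthAt_succ hidx, hc0, if_neg h1, if_neg h2]
            ring
          rw [hd]
          exact ih (idx + 1) ht (by omega) (fun j hj1 hj2 => hno j (by omega) hj2)
    · -- idx = i: the trigger fires
      have heq : idx = i := by omega
      subst heq
      have hdg : PySem.Chars.isdigit c = true := by rw [← hc0]; exact htr.1
      simp only [explodeGo]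
      rw [if_neg (by simpa using dg_ne_lb hdg)]
      rw [if_neg (by simpa using dg_ne_rb hdg)]
      rw [if_pos (by simp [hdg]; exact htr.2)]
      rfl

-- ---------- find on the pair ----------

theorem find_singleton_eq {l : List Char} {ch : Char} {m : Nat} (hm : m < l.length)
    (hat : l.getD m ' ' = ch) (hbefore : ∀ k < m, l.getD k ' ' ≠ ch) :
    PySem.Chars.find l [ch] = (m : Int) := by
  have hpref : ∀ k, k < l.length → (([ch] <+: l.drop k) ↔ l.getD k ' ' = ch) := by
    intro k hk
    rw [List.drop_eq_getElem_cons hk]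
    constructor
    · rintro ⟨s, hs⟩
      rw [getD_of_getElem hk]
      injection hs with h1 _
      exact h1.symm
    · intro h
      rw [getD_of_getElem hk] at h
      exact ⟨l.drop (k + 1), by simp [h]⟩
  have hinf : [ch] <:+: l := by
    have h1 : [ch] <+: l.drop m := (hpref m hm).mpr hat
    exact h1.isInfix.trans (l.drop_suffix m).isInfix
  have hnn : 0 ≤ PySem.Chars.find l [ch] := (PySem.Chars.find_nonneg_iff _ _).mpr hinf
  obtain ⟨hp, hmin⟩ := PySem.Chars.find_spec (s := l) (sub := [ch]) hnn
  have hfl : (PySem.Chars.find l [ch]).toNat < l.length := by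
    by_contra hc
    rw [List.drop_eq_nil_of_le (by omega)] at hp
    obtain ⟨s, hs⟩ := hp
    cases hs
  have heq : (PySem.Chars.find l [ch]).toNat = m := by
    rcases Nat.lt_trichotomy (PySem.Chars.find l [ch]).toNat m with h | h | h
    · exact absurd ((hpref _ hfl).mp hp) (hbefore _ h)
    · exact h
    · exact absurd ((hpref m hm).mpr hat) (hmin m h)
  omega

-- ---------- end_of_number / start_of_number ----------

theorem endOfNumber_run {R : List Char} (hR : allDg R) {x : Char}
    (hx : PySem.Chars.isdigit x = false) (Z : List Char) :
    endOfNumber (R ++ x :: Z) = some R.length := by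
  induction R with
  | nil => simp [endOfNumber, hx]
  | cons c t ih =>
    have hd : PySem.Chars.isdigit c = true := hR c (by simp)
    simp only [List.cons_append, endOfNumber, hd, if_true]
    rw [ih (fun y hy => hR y (by simp [hy]))]
    rfl

theorem sonRev_allDg {E : List Char} (h : allDg E) (n : Nat) : sonRev E n = none := by
  induction E generalizing n with
  | nil => rfl
  | cons c t ih =>
    simp only [sonRev, h c (by simp), if_true]
    exact ih (fun y hy => h y (by simp [hy])) _

theorem sonRev_run {D : List Char} (hD : allDg D) {x : Char}
    (hx : PySem.Chars.isdigit x = false) (Y : List Char) (n : Nat) :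
    sonRev (D ++ x :: Y) n = some (n - D.length) := by
  induction D generalizing n with
  | nil => simp [sonRev, hx]
  | cons c t ih =>
    simp only [List.cons_append, sonRev, hD c (by simp), if_true]
    rw [ih (fun y hy => hD y (by simp [hy]))]
    simp only [List.length_cons]
    congr 1
    omega

-- ---------- forward add (right side) ----------

theorem aerFwd_acc : ∀ (rest pre : List Char) (v : Int),
    aerFwd pre rest v = pre ++ aerFwd [] rest v := by
  intro rest
  induction rest with
  | nil => intro pre v; simp [aerFwd]
  | cons c t ih =>
    intro pre v
    by_cases hd : PySem.Chars.isdigit c = true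
    · simp only [aerFwd, hd, if_true]
      cases endOfNumber (c :: t) <;> simp
    · have hd' : PySem.Chars.isdigit c = false := by simpa using hd
      simp only [aerFwd, hd', Bool.false_eq_true, if_false, List.nil_append]
      rw [ih (pre ++ [c]) v, ih [c] v]
      simp

theorem rightOk_tail {c : Char} {t : List Char} (hc : PySem.Chars.isdigit c = false)
    (h : rightOk (c :: t)) : rightOk t := by
  unfold rightOk at h ⊢
  intro ⟨j, hj, hdg, hfirst, hall⟩
  apply h
  refine ⟨j + 1, by simpa using hj, by simpa using hdg, ?_, ?_⟩
  · intro k hk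
    cases k with
    | zero => simpa using hc
    | succ m => have := hfirst m (by omega); simpa using this
  · intro k hk1 hk2
    cases k with
    | zero => omega
    | succ m =>
      have := hall m (by omega) (by simpa using hk2)
      simpa using this

theorem rightOk_no_all_digits {c : Char} {t : List Char}
    (hc : PySem.Chars.isdigit c = true) (h : rightOk (c :: t)) :
    t.dropWhile PySem.Chars.isdigit ≠ [] := by
  intro hnil
  have hall : ∀ x ∈ t, PySem.Chars.isdigit x = true := by
    intro x hx
    have htk : t.takeWhile PySem.Chars.isdigit = t := by
      have h0 := List.takeWhile_append_dropWhile (p := PySem.Chars.isdigit) (l := t)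
      rw [hnil, List.append_nil] at h0
      exact h0
    rw [← htk] at hx
    exact List.mem_takeWhile_imp hx
  apply h
  refine ⟨0, by simp, by simpa using hc, by omega, ?_⟩
  intro k _ hk2
  cases k with
  | zero => simpa using hc
  | succ m =>
    have hm : m < t.length := by simpa using hk2
    have : t.getD m ' ' ∈ t := by
      rw [getD_of_getElem hm]; exact List.getElem_mem hm
    simpa using hall _ this

theorem rightAdd_eq : ∀ n (S : List Char), S.length ≤ n → ∀ (v : Int), rightOk S →
    aerFwd [] S v = (addFirstTok (tokenize S) v).flatten := by
  intro n
  induction n with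
  | zero =>
    intro S h v _
    rw [Nat.le_zero, List.length_eq_zero_iff] at h; subst h; rfl
  | succ n ih =>
    intro S h v hok
    cases S with
    | nil => rfl
    | cons c t =>
      by_cases hd : PySem.Chars.isdigit c = true
      · -- digit run at the head; rightOk says it terminates before the end
        have htd := rightOk_no_all_digits hd hok
        obtain ⟨x, td', hx⟩ : ∃ x td', t.dropWhile PySem.Chars.isdigit = x :: td' := by
          cases hcase : t.dropWhile PySem.Chars.isdigit with
          | nil => exact absurd hcase htd
          | cons a b => exact ⟨a, b, rfl⟩
        have hxnd : PySem.Chars.isdigit x = false := dropWhile_head_ndg hx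
        have hrun : c :: t = (c :: t.takeWhile PySem.Chars.isdigit) ++ x :: td' := by
          rw [List.cons_append, ← hx, List.takeWhile_append_dropWhile]
        have hRdg : allDg (c :: t.takeWhile PySem.Chars.isdigit) := by
          intro y hy
          rcases List.mem_cons.mp hy with rfl | hy'
          · exact hd
          · exact List.mem_takeWhile_imp hy'
        -- A side
        have hEnd : endOfNumber (c :: t) =
            some (c :: t.takeWhile PySem.Chars.isdigit).length := by
          rw [show (c :: t) = (c :: t.takeWhile PySem.Chars.isdigit) ++ x :: td' from hrun]
          exact endOfNumber_run hRdg hxnd _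
        simp only [aerFwd, hd, if_true, hEnd]
        have htake : (c :: t).take (c :: t.takeWhile PySem.Chars.isdigit).length =
            c :: t.takeWhile PySem.Chars.isdigit := by
          conv_lhs => rw [hrun]
          exact List.take_append_of_le_length le_rfl |>.trans (List.take_of_length_le le_rfl)
        have hdrop : (c :: t).drop (c :: t.takeWhile PySem.Chars.isdigit).length = x :: td' := by
          conv_lhs => rw [hrun]
          rw [drop_append_len le_rfl]
          simp
        rw [htake, hdrop]
        -- B side
        rw [tokenize_cons_dg hd, hx]
        simp only [addFirstTok, headDg, hd, if_true]
        rw [List.flatten_cons]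
        have : (tokenize (x :: td')).flatten = x :: td' := flatten_tokenize' _
        rw [this]
        simp
      · have hd' : PySem.Chars.isdigit c = false := by simpa using hd
        simp only [aerFwd, hd', Bool.false_eq_true, if_false, List.nil_append]
        rw [aerFwd_acc t [c] v]
        rw [tokenize_cons_ndg hd']
        simp only [addFirstTok, headDg, hd', Bool.false_eq_true, if_false]
        rw [List.flatten_cons]
        rw [ih t (by simpa using h) v (rightOk_tail hd' hok)]

-- ---------- backward add (left side) ----------

theorem range_reverse_succ (n : Nat) :
    (List.range (n + 1)).reverse = n :: (List.range n).reverse := by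
  simp [List.range_succ]

theorem aerBwd_skip {L : List Char} {v : Int} : ∀ (m k : Nat),
    (∀ i, k ≤ i → i < k + m → PySem.Chars.isdigit (L.getD i ' ') = false) →
    aerBwdGo L v (List.range (k + m)).reverse = aerBwdGo L v (List.range k).reverse := by
  intro m
  induction m with
  | zero => intro k _; rfl
  | succ m ih =>
    intro k h
    rw [show k + (m + 1) = (k + m) + 1 by omega, range_reverse_succ]
    simp only [aerBwdGo, h (k + m) (by omega) (by omega), Bool.false_eq_true, if_false]
    exact ih k (fun i h1 h2 => h i h1 (by omega))

theorem aerBwd_fire {M R T : List Char} {x : Char} (hx : PySem.Chars.isdigit x = false)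
    (hR : allDg R) (hRne : R ≠ []) (v : Int) :
    aerBwdGo (M ++ x :: R ++ T) v (List.range (M.length + 1 + R.length)).reverse =
      (M ++ x :: PySem.Int.toChars ((PySem.Int.ofChars? R).getD 0 + v)) ++ T := by
  obtain ⟨R', z, hz⟩ : ∃ R' z, R = R' ++ [z] := by
    cases hR2 : R.reverse with
    | nil => exact absurd (by simpa using congrArg List.reverse hR2) hRne
    | cons a b => exact ⟨b.reverse, a, by have := congrArg List.reverse hR2; simpa using this⟩
  subst hz
  set L := M ++ x :: (R' ++ [z]) ++ T with hL
  have hidx : M.length + 1 + (R' ++ [z]).length = (M.length + 1 + R'.length) + 1 := by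
    simp only [List.length_append, List.length_cons, List.length_nil]; omega
  rw [hidx, range_reverse_succ]
  have hzd : PySem.Chars.isdigit z = true := hR z (by simp)
  have hgetz : L.getD (M.length + 1 + R'.length) ' ' = z := by
    rw [hL]
    have : M ++ x :: (R' ++ [z]) ++ T = (M ++ x :: R') ++ z :: T := by simp
    rw [this, getD_append_right (by simp only [List.length_append, List.length_cons]; omega)]
    rw [show M.length + 1 + R'.length - (M ++ x :: R').length = 0 by simp only [List.length_append, List.length_cons]; omega]
    rfl
  have htakeidx : L.take (M.length + 1 + R'.length) = M ++ x :: R' := by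
    rw [hL]
    have : M ++ x :: (R' ++ [z]) ++ T = (M ++ x :: R') ++ z :: T := by simp
    rw [this, List.take_append_of_le_length (by simp only [List.length_append, List.length_cons]; omega)]
    exact List.take_of_length_le (by simp only [List.length_append, List.length_cons]; omega)
  simp only [aerBwdGo, hgetz, hzd, if_true]
  rw [htakeidx]
  have hrev : (M ++ x :: R').reverse = R'.reverse ++ x :: M.reverse := by simp
  rw [hrev, sonRev_run (fun y hy => hR y (by simp at hy ⊢; tauto)) hx]
  simp only [List.length_reverse]
  have hst : M.length + 1 + R'.length - R'.length = M.length + 1 := by omega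
  rw [hst]
  have htake2 : L.take (M.length + 1) = M ++ [x] := by
    rw [hL]
    have : M ++ x :: (R' ++ [z]) ++ T = (M ++ [x]) ++ (R' ++ [z]) ++ T := by simp
    rw [this, List.append_assoc, List.take_append_of_le_length (by simp)]
    exact List.take_of_length_le (by simp)
  have htake3 : L.take (M.length + 1 + R'.length + 1) = (M ++ [x]) ++ (R' ++ [z]) := by
    rw [hL]
    have : M ++ x :: (R' ++ [z]) ++ T = ((M ++ [x]) ++ (R' ++ [z])) ++ T := by simp
    rw [this, List.take_append_of_le_length (by simp only [List.length_append, List.length_cons, List.length_nil]; omega)]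
    exact List.take_of_length_le (by simp only [List.length_append, List.length_cons, List.length_nil]; omega)
  have hdrop3 : L.drop (M.length + 1 + R'.length + 1) = T := by
    rw [hL]
    have : M ++ x :: (R' ++ [z]) ++ T = ((M ++ [x]) ++ (R' ++ [z])) ++ T := by simp
    rw [this, drop_append_len (by simp only [List.length_append, List.length_cons, List.length_nil]; omega)]
    rw [show M.length + 1 + R'.length + 1 - ((M ++ [x]) ++ (R' ++ [z])).length = 0 by simp only [List.length_append, List.length_cons, List.length_nil]; omega]
    rfl
  rw [htake2, htake3, hdrop3]
  have hdropmid : ((M ++ [x]) ++ (R' ++ [z])).drop (M.length + 1) = R' ++ [z] := by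
    rw [drop_append_len (by simp)]
    simp
  rw [hdropmid]
  simp

theorem aerBwd_fire_bad {R T : List Char} (hR : allDg R) (hRne : R ≠ []) (v : Int) :
    aerBwdGo (R ++ T) v (List.range R.length).reverse =
      ((R ++ T) ++ PySem.Int.toChars ((PySem.Int.ofChars? R).getD 0 + v)) ++ T := by
  obtain ⟨R', z, hz⟩ : ∃ R' z, R = R' ++ [z] := by
    cases hR2 : R.reverse with
    | nil => exact absurd (by simpa using congrArg List.reverse hR2) hRne
    | cons a b => exact ⟨b.reverse, a, by have := congrArg List.reverse hR2; simpa using this⟩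
  subst hz
  rw [show (R' ++ [z]).length = R'.length + 1 by simp, range_reverse_succ]
  have hzd : PySem.Chars.isdigit z = true := hR z (by simp)
  have hget : ((R' ++ [z]) ++ T).getD R'.length ' ' = z := by
    rw [List.append_assoc, getD_append_right le_rfl]
    simp
  simp only [aerBwdGo, hget, hzd, if_true]
  have htake : ((R' ++ [z]) ++ T).take R'.length = R' := by
    rw [List.append_assoc, List.take_append_of_le_length (by simp)]
    exact List.take_of_length_le le_rfl
  have hR' : allDg R'.reverse := by
    intro y hy
    rw [List.mem_reverse] at hy
    exact hR y (List.mem_append_left _ hy)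
  rw [htake, sonRev_allDg hR']
  have htake1 : ((R' ++ [z]) ++ T).take (R'.length + 1) = R' ++ [z] := by
    rw [List.take_append_of_le_length (by simp)]
    exact List.take_of_length_le (by simp)
  have hdrop1 : ((R' ++ [z]) ++ T).drop (R'.length + 1) = T := by
    rw [drop_append_len (by simp)]
    simp
  rw [htake1, hdrop1]

theorem aerBwd_noDg {L : List Char} (h : noDg L) (v : Int) :
    aerBwdGo L v (List.range L.length).reverse = L := by
  have := aerBwd_skip (L := L) (v := v) L.length 0 (by
    intro i h1 h2
    have hi : i < L.length := by omega
    rw [getD_of_getElem hi]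
    exact h _ (List.getElem_mem hi))
  simpa using this

-- ---------- token-level add helpers ----------

theorem headDg_allDg {R : List Char} (hR : allDg R) (hne : R ≠ []) : headDg R = true := by
  cases R with
  | nil => cases hne rfl
  | cons c t => exact hR c (by simp)

theorem addLastRev_skip {Ts rest : List (List Char)} (h : ∀ tk ∈ Ts, headDg tk = false)
    (v : Int) : addLastRev (Ts ++ rest) v = Ts ++ addLastRev rest v := by
  induction Ts with
  | nil => rfl
  | cons a b ih =>
    simp only [List.cons_append, addLastRev, h a (by simp), Bool.false_eq_true, if_false]
    rw [ih (fun tk htk => h tk (by simp [htk]))]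

theorem headDg_map_singleton {T : List Char} (h : noDg T) :
    ∀ tk ∈ (T.map (fun c => [c])), headDg tk = false := by
  intro tk htk
  obtain ⟨c, hc, rfl⟩ := List.mem_map.mp htk
  exact h c hc

-- value of the token-level backward add on the three left-side shapes
theorem addLast_noDg {L : List Char} (h : noDg L) (v : Int) :
    (addLastTok (tokenize L) v).flatten = L := by
  unfold addLastTok
  rw [tokenize_noDg h]
  have : addLastRev ((L.map (fun c => [c])).reverse) v = (L.map (fun c => [c])).reverse := by
    have hh : ∀ tk ∈ (L.map (fun c => [c])).reverse, headDg tk = false := by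
      intro tk htk
      exact headDg_map_singleton h tk (List.mem_reverse.mp htk)
    have := addLastRev_skip (Ts := (L.map (fun c => [c])).reverse) (rest := []) hh v
    simpa [addLastRev] using this
  rw [this]
  simp [← tokenize_noDg h, flatten_tokenize']

theorem addLast_main {M R T : List Char} {x : Char} (hx : PySem.Chars.isdigit x = false)
    (hMx : ∀ a, M.getLast? = some a → PySem.Chars.isdigit a = false ∨ True)
    (hR : allDg R) (hRne : R ≠ []) (hT : noDg T) (v : Int) :
    (addLastTok (tokenize (M ++ x :: R ++ T)) v).flatten =
      (M ++ x :: PySem.Int.toChars ((PySem.Int.ofChars? R).getD 0 + v)) ++ T := by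
  have hsplit1 : tokenize (M ++ x :: R ++ T) = tokenize (M ++ [x]) ++ tokenize (R ++ T) := by
    have : M ++ x :: R ++ T = (M ++ [x]) ++ (R ++ T) := by simp
    rw [this]
    refine tokenize_append (M ++ [x]).length _ _ le_rfl (Or.inl ?_)
    intro a ha
    rw [List.getLast?_append_of_ne_nil M (by simp)] at ha
    simp at ha
    subst ha
    exact hx
  have hsplit2 : tokenize (M ++ [x]) = tokenize M ++ [[x]] := by
    rw [tokenize_append M.length M [x] le_rfl (Or.inr (by intro b hb; simp at hb; subst hb; exact hx))]
    rw [tokenize_singleton_ndg hx]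
  have hsplit3 : tokenize (R ++ T) = R :: tokenize T := by
    refine tokenize_run hR hRne ?_
    intro b hb
    cases T with
    | nil => cases hb
    | cons u r => simp at hb; subst hb; exact hT u (by simp)
  rw [hsplit1, hsplit2, hsplit3, tokenize_noDg hT]
  unfold addLastTok
  have hrev : ((tokenize M ++ [[x]]) ++ R :: (T.map (fun c => [c]))).reverse =
      (T.map (fun c => [c])).reverse ++ R :: ([x] :: (tokenize M).reverse) := by
    simp
  rw [hrev]
  rw [addLastRev_skip (fun tk htk => headDg_map_singleton hT tk (List.mem_reverse.mp htk)) v]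
  simp only [addLastRev, headDg_allDg hR hRne, if_true]
  rw [List.reverse_append]
  simp only [List.reverse_cons, List.reverse_reverse]
  simp [List.flatten_append, flatten_tokenize' M, flatten_map_singleton]

theorem addLast_bad {R T : List Char} (hR : allDg R) (hRne : R ≠ []) (hT : noDg T) (v : Int) :
    (addLastTok (tokenize (R ++ T)) v).flatten =
      PySem.Int.toChars ((PySem.Int.ofChars? R).getD 0 + v) ++ T := by
  have hsplit3 : tokenize (R ++ T) = R :: tokenize T := by
    refine tokenize_run hR hRne ?_
    intro b hb
    cases T with
    | nil => cases hb
    | cons u r => simp at hb; subst hb; exact hT u (by simp)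
  rw [hsplit3, tokenize_noDg hT]
  unfold addLastTok
  rw [show (R :: (T.map (fun c => [c]))).reverse = (T.map (fun c => [c])).reverse ++ R :: [] by simp]
  rw [addLastRev_skip (fun tk htk => headDg_map_singleton hT tk (List.mem_reverse.mp htk)) v]
  simp only [addLastRev, headDg_allDg hR hRne, if_true]
  rw [List.reverse_append]
  simp [List.flatten_append, flatten_map_singleton]

-- decomposition of a left part that contains a digit
theorem left_decomp {L : List Char} (hdig : ∃ c ∈ L, PySem.Chars.isdigit c = true) :
    ∃ F T, L = F ++ T ∧ noDg T ∧ F ≠ [] ∧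
      ∃ R M', F = M' ++ R ∧ allDg R ∧ R ≠ [] ∧
        (M' = [] ∨ ∃ M x, M' = M ++ [x] ∧ PySem.Chars.isdigit x = false) := by
  set T := (L.reverse.takeWhile (fun c => ! PySem.Chars.isdigit c)).reverse with hT
  set F := (L.reverse.dropWhile (fun c => ! PySem.Chars.isdigit c)).reverse with hF
  have hLsplit : L = F ++ T := by
    rw [hT, hF, ← List.reverse_append, List.takeWhile_append_dropWhile, List.reverse_reverse]
  have hTnd : noDg T := by
    intro c hc
    rw [hT, List.mem_reverse] at hc
    have := List.mem_takeWhile_imp hc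
    simpa using this
  have hFne : F ≠ [] := by
    intro hc
    obtain ⟨c, hc1, hc2⟩ := hdig
    rw [hLsplit, hc] at hc1
    simp at hc1
    rw [hTnd c hc1] at hc2
    cases hc2
  obtain ⟨g, gs, hGgs⟩ : ∃ g gs,
      L.reverse.dropWhile (fun c => ! PySem.Chars.isdigit c) = g :: gs := by
    cases hc : L.reverse.dropWhile (fun c => ! PySem.Chars.isdigit c) with
    | nil => exact absurd (by rw [hF, hc]; rfl) hFne
    | cons a b => exact ⟨a, b, rfl⟩
  have hgd : PySem.Chars.isdigit g = true := by
    have := dropWhile_head_false hGgs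
    simpa using this
  -- now split F from its right end
  set G := L.reverse.dropWhile (fun c => ! PySem.Chars.isdigit c) with hG
  set R := (G.takeWhile PySem.Chars.isdigit).reverse with hR
  set M' := (G.dropWhile PySem.Chars.isdigit).reverse with hM
  have hFsplit : F = M' ++ R := by
    rw [hF, hR, hM, ← List.reverse_append, List.takeWhile_append_dropWhile]
  have hRdg : allDg R := by
    intro c hc
    rw [hR, List.mem_reverse] at hc
    exact List.mem_takeWhile_imp hc
  have hRne : R ≠ [] := by
    intro hc
    rw [hR] at hc
    have h0 : G.takeWhile PySem.Chars.isdigit = [] := by simpa using congrArg List.reverse hc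
    rw [show G = g :: gs from hGgs] at h0
    rw [List.takeWhile_cons_of_pos hgd] at h0
    cases h0
  refine ⟨F, T, hLsplit, hTnd, hFne, R, M', hFsplit, hRdg, hRne, ?_⟩
  cases hMc : G.dropWhile PySem.Chars.isdigit with
  | nil => left; rw [hM, hMc]; rfl
  | cons u r =>
    right
    have hund : PySem.Chars.isdigit u = false := dropWhile_head_false hMc
    exact ⟨r.reverse, u, by rw [hM, hMc]; simp, hund⟩

-- has-digit decidable helper
theorem noDg_or_digit (L : List Char) :
    noDg L ∨ ∃ c ∈ L, PySem.Chars.isdigit c = true := by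
  by_cases h : ∀ c ∈ L, PySem.Chars.isdigit c = false
  · exact Or.inl h
  · right
    push_neg at h
    obtain ⟨c, hc1, hc2⟩ := h
    exact ⟨c, hc1, by simpa using hc2⟩

theorem leftAdd_eq {L : List Char} (hbad : ¬ badL L) (v : Int) :
    aerBwdGo L v (List.range L.length).reverse = (addLastTok (tokenize L) v).flatten := by
  rcases noDg_or_digit L with hnd | hdig
  · rw [aerBwd_noDg hnd, addLast_noDg hnd]
  · obtain ⟨F, T, hLs, hTnd, hFne, R, M', hFs, hRdg, hRne, hM'⟩ := left_decomp hdig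
    rcases hM' with hM0 | ⟨M, x, hMx, hxnd⟩
    · exfalso
      apply hbad
      exact ⟨R, T, by rw [hLs, hFs, hM0]; simp, hRne, hRdg, hTnd⟩
    · have hLshape : L = M ++ x :: R ++ T := by
        rw [hLs, hFs, hMx]; simp
      rw [hLshape]
      have hlen : (M ++ x :: R ++ T).length = (M.length + 1 + R.length) + T.length := by
        simp; omega
      rw [hlen]
      rw [aerBwd_skip T.length (M.length + 1 + R.length) (by
        intro i h1 h2
        have : (M ++ x :: R ++ T).getD i ' ' = T.getD (i - (M.length + 1 + R.length)) ' ' := by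
          have hsh : M ++ x :: R ++ T = (M ++ x :: R) ++ T := by simp
          rw [hsh, getD_append_right (by simp; omega)]
          congr 1
          simp
          omega
        rw [this]
        have hi : i - (M.length + 1 + R.length) < T.length := by omega
        rw [getD_of_getElem hi]
        exact hTnd _ (List.getElem_mem hi))]
      rw [aerBwd_fire hxnd hRdg hRne v]
      rw [addLast_main hxnd (fun _ _ => Or.inr trivial) hRdg hRne hTnd v]

-- ---------- the B-side scan ----------

-- "no trigger relative to an ambient depth d"
def noTrigRel (d : Int) (cs : List Char) : Prop :=
  ∀ j < cs.length, ¬ (PySem.Chars.isdigit (cs.getD j ' ') = true ∧ 4 < d + depthAt cs j)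

theorem findStart_tok : ∀ n (P : List Char), P.length ≤ n → ∀ (Rt : List (List Char)) (i : Nat) (d : Int),
    noTrigRel d P →
    findStart (tokenize P ++ Rt) i d =
      findStart Rt (i + (tokenize P).length) (d + depthAt P P.length) := by
  intro n
  induction n with
  | zero =>
    intro P h Rt i d _
    rw [Nat.le_zero, List.length_eq_zero_iff] at h; subst h
    simp [tokenize, tokGo, depthAt_zero]
  | succ n ih =>
    intro P h Rt i d hno
    cases P with
    | nil => simp [tokenize, tokGo, depthAt_zero]
    | cons c t =>
      by_cases hd : PySem.Chars.isdigit c = true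
      · -- digit run token
        rw [tokenize_cons_dg hd]
        have hnotr : ¬ (4 < d) := by
          have := hno 0 (by simp)
          rw [depthAt_zero] at this
          simp only [List.getD_cons_zero] at this
          intro hc
          exact this ⟨hd, by omega⟩
        simp only [List.cons_append, findStart]
        rw [if_neg (by
          intro hc
          rw [show ((c :: t.takeWhile PySem.Chars.isdigit : List Char) == ['[']) = true ↔
            (c :: t.takeWhile PySem.Chars.isdigit) = ['['] from beq_iff_eq] at hc
          have : c = '[' := by injection hc
          exact dg_ne_lb hd this)]
        rw [if_neg (by
          intro hc
          rw [show ((c :: t.takeWhile PySem.Chars.isdigit : List Char) == [']']) = true ↔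
            (c :: t.takeWhile PySem.Chars.isdigit) = [']'] from beq_iff_eq] at hc
          have : c = ']' := by injection hc
          exact dg_ne_rb hd this)]
        rw [if_neg (by
          simp only [headDg, hd, Bool.true_and, decide_eq_true_eq]
          exact hnotr)]
        -- step over the run: depth unchanged
        have hrunsplit : c :: t = (c :: t.takeWhile PySem.Chars.isdigit) ++ t.dropWhile PySem.Chars.isdigit := by
          rw [List.cons_append, List.takeWhile_append_dropWhile]
        have hrundg : allDg (c :: t.takeWhile PySem.Chars.isdigit) := by
          intro y hy
          rcases List.mem_cons.mp hy with rfl | hy'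
          · exact hd
          · exact List.mem_takeWhile_imp hy'
        have hnd : noTrigRel d (t.dropWhile PySem.Chars.isdigit) := by
          intro j hj hcon
          set W := c :: t.takeWhile PySem.Chars.isdigit with hW
          have hidx : W.length + j < (c :: t).length := by
            rw [hrunsplit]; simp; omega
          apply hno (W.length + j) hidx
          constructor
          · rw [show (c :: t) = W ++ t.dropWhile PySem.Chars.isdigit from hrunsplit,
              getD_append_right (by simp)]
            simpa using hcon.1
          · rw [show (c :: t) = W ++ t.dropWhile PySem.Chars.isdigit from hrunsplit,
              depthAt_append_add, depthAt_allDg hrundg]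
            simpa using hcon.2
        have hdepth : depthAt (c :: t) (c :: t).length =
            depthAt (t.dropWhile PySem.Chars.isdigit) (t.dropWhile PySem.Chars.isdigit).length := by
          conv_lhs => rw [hrunsplit]
          rw [show ((c :: t.takeWhile PySem.Chars.isdigit) ++ t.dropWhile PySem.Chars.isdigit).length
              = (c :: t.takeWhile PySem.Chars.isdigit).length + (t.dropWhile PySem.Chars.isdigit).length from
              List.length_append]
          rw [depthAt_append_add, depthAt_allDg hrundg]
          simp
        have hidx2 : i + 1 + (tokenize (t.dropWhile PySem.Chars.isdigit)).length =
            i + (tokenize (c :: t)).length := by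
          rw [tokenize_cons_dg hd]
          simp only [List.length_cons]
          omega
        rw [ih (t.dropWhile PySem.Chars.isdigit)
          (le_trans (List.length_dropWhile_le _ _) (by simpa using h)) Rt (i + 1) d hnd]
        rw [hidx2, ← hdepth, tokenize_cons_dg hd]
      · have hd' : PySem.Chars.isdigit c = false := by simpa using hd
        rw [tokenize_cons_ndg hd']
        have hstep : ∀ (b : Int), (if c = '[' then (1:Int) else if c = ']' then -1 else 0) = b →
            noTrigRel (d + b) t := by
          intro b hb j hj hcon
          apply hno (1 + j) (by simp; omega)
          constructor
          · rw [show (c :: t) = [c] ++ t by simp, getD_append_right (by simp)]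
            simpa using hcon.1
          · rw [show (c :: t) = [c] ++ t by simp,
              show (1 : Nat) + j = ([c] : List Char).length + j from rfl,
              depthAt_append_add]
            have hone : depthAt [c] ([c] : List Char).length = (if c = '[' then (1:Int) else if c = ']' then -1 else 0) := by
              unfold depthAt
              by_cases h1 : c = '['
              · subst h1; simp [List.count_singleton]
              · by_cases h2 : c = ']'
                · subst h2; simp [List.count_singleton]
                · simp [List.count_singleton, h1, h2, Ne.symm h1, Ne.symm h2]
            rw [hone, hb]
            have := hcon.2
            omega
        have hdepthcons : ∀ (b : Int), (if c = '[' then (1:Int) else if c = ']' then -1 else 0) = b →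
            depthAt (c :: t) (c :: t).length = b + depthAt t t.length := by
          intro b hb
          rw [show (c :: t) = [c] ++ t by simp,
            show ([c] ++ t).length = ([c] : List Char).length + t.length from List.length_append,
            depthAt_append_add]
          have hone : depthAt [c] ([c] : List Char).length = (if c = '[' then (1:Int) else if c = ']' then -1 else 0) := by
            unfold depthAt
            by_cases h1 : c = '['
            · subst h1; simp [List.count_singleton]
            · by_cases h2 : c = ']'
              · subst h2; simp [List.count_singleton]
              · simp [List.count_singleton, h1, h2, Ne.symm h1, Ne.symm h2]
          rw [hone, hb]
        by_cases h1 : c = '['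
        · subst h1
          simp only [List.cons_append, findStart, if_pos (by rfl : (([('[' : Char)] : List Char) == ['[']) = true)]
          rw [ih t (by simpa using h) Rt (i + 1) (d + 1) (hstep 1 (by simp))]
          rw [hdepthcons 1 (by simp)]
          congr 1
          · simp only [List.length_cons]; omega
          · ring
        · by_cases h2 : c = ']'
          · subst h2
            simp only [List.cons_append, findStart]
            rw [if_neg (by decide), if_pos (by rfl : (([(']' : Char)] : List Char) == [']']) = true)]
            rw [ih t (by simpa using h) Rt (i + 1) (d - 1) (hstep (-1) (by simp))]
            rw [hdepthcons (-1) (by simp)]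
            congr 1
            · simp only [List.length_cons]; omega
            · ring
          · simp only [List.cons_append, findStart]
            rw [if_neg (by simpa [beq_iff_eq] using h1), if_neg (by simpa [beq_iff_eq] using h2)]
            rw [if_neg (by simp [headDg, hd'])]
            rw [ih t (by simpa using h) Rt (i + 1) d (by simpa using hstep 0 (by simp [h1, h2]))]
            rw [hdepthcons 0 (by simp [h1, h2])]
            congr 1
            · simp only [List.length_cons]; omega
            · ring

-- ---------- assembling the two sides ----------

theorem depthAt_take {cs : List Char} {i j : Nat} (h : j ≤ i) :
    depthAt (cs.take i) j = depthAt cs j := by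
  unfold depthAt
  rw [List.take_take, Nat.min_eq_left h]

-- splitting takeWhile/dropWhile at a boundary where the predicate flips
theorem while_split {p : Char → Bool} {R W : List Char} (hR : ∀ c ∈ R, p c = true)
    (hW : ∀ b, W.head? = some b → p b = false) :
    (R ++ W).takeWhile p = R ∧ (R ++ W).dropWhile p = W := by
  have htkW : W.takeWhile p = [] := by
    cases W with
    | nil => rfl
    | cons z r => simp [List.takeWhile, hW z rfl]
  have hdwW : W.dropWhile p = W := by
    cases W with
    | nil => rfl
    | cons z r => simp [List.dropWhile, hW z rfl]
  have h1 : R.takeWhile p = R := List.takeWhile_eq_self_iff.mpr hR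
  have h2 : R.dropWhile p = [] := by
    simp [List.dropWhile_eq_nil_iff]; exact fun x hx => hR x hx
  constructor
  · rw [List.takeWhile_append]
    simp [h1, htkW]
  · rw [List.dropWhile_append]
    simp [h2, hdwW]

theorem depthAt_append_left {Y Z : List Char} {j : Nat} (h : j ≤ Y.length) :
    depthAt (Y ++ Z) j = depthAt Y j := by
  unfold depthAt
  rw [List.take_append_of_le_length h]

-- bracket balance of the middle block, read off as a prefix depth
theorem bal_prefix {R M V : List Char} (hR : allDg R) :
    depthAt (R ++ M ++ V) (R.length + M.length) =
      ((M.count '[' : Int) - (M.count ']' : Int)) := by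
  rw [show R ++ M ++ V = R ++ (M ++ V) by simp, depthAt_append_add, depthAt_allDg hR]
  unfold depthAt
  rw [List.take_left]
  ring

-- the change region, re-read as "the first trigger exists and its left context has shape badL"
theorem D_iff (number : String) : D_explode number ↔
    ∃ i, i < number.toList.length ∧ trigAt number.toList i ∧
      (∀ j < i, ¬ trigAt number.toList j) ∧ badL (number.toList.take (i - 1)) := by
  unfold D_explode
  generalize number.toList = cs
  constructor
  · rintro ⟨hRne, hVne, hbal⟩
    set R := cs.takeWhile PySem.Chars.isdigit with hRdef
    set U := cs.dropWhile PySem.Chars.isdigit with hUdef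
    set M := U.takeWhile (fun c => ! PySem.Chars.isdigit c) with hMdef
    set V := U.dropWhile (fun c => ! PySem.Chars.isdigit c) with hVdef
    have hcs : cs = R ++ M ++ V := by
      rw [hMdef, hVdef, hRdef, hUdef]
      rw [List.append_assoc, List.takeWhile_append_dropWhile, List.takeWhile_append_dropWhile]
    have hRdg : allDg R := fun c hc => List.mem_takeWhile_imp hc
    have hMnd : noDg M := by
      intro c hc
      have := List.mem_takeWhile_imp hc
      simpa using this
    obtain ⟨v0, V', hV0⟩ : ∃ v0 V', V = v0 :: V' := by
      cases hc : V with
      | nil => exact absurd hc hVne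
      | cons u r => exact ⟨u, r, rfl⟩
    have hv0 : PySem.Chars.isdigit v0 = true := by
      have := dropWhile_head_false (p := fun c => ! PySem.Chars.isdigit c) (hVdef ▸ hV0)
      simpa using this
    have hMne : M ≠ [] := by
      intro hc
      rw [hc] at hbal
      simp at hbal
    have hR1 : 1 ≤ R.length := by
      cases hR0 : R with
      | nil => exact absurd hR0 hRne
      | cons a b => simp [hR0]
    have hM1 : 1 ≤ M.length := by
      cases hM0 : M with
      | nil => exact absurd hM0 hMne
      | cons a b => simp [hM0]
    refine ⟨R.length + M.length, ?_, ⟨?_, ?_⟩, ?_, ?_⟩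
    · rw [hcs, hV0]; simp
    · rw [hcs, show R ++ M ++ V = (R ++ M) ++ V by simp,
        getD_append_right (by simp), hV0]
      simp [hv0]
    · rw [hcs, bal_prefix hRdg]
      exact hbal
    · intro j hj htr
      rcases Nat.lt_or_ge j R.length with h | h
      · have hd0 : depthAt cs j = 0 := by
          rw [hcs, show R ++ M ++ V = R ++ (M ++ V) by simp,
            depthAt_append_left (by omega), depthAt_allDg hRdg]
        have := htr.2
        omega
      · have : cs.getD j ' ' = M.getD (j - R.length) ' ' := by
          rw [hcs, show R ++ M ++ V = R ++ (M ++ V) by simp,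
            getD_append_right (by omega), getD_append_left (by omega)]
        have hnd : PySem.Chars.isdigit (cs.getD j ' ') = false := by
          rw [this]
          have hlt : j - R.length < M.length := by omega
          rw [getD_of_getElem hlt]
          exact hMnd _ (List.getElem_mem hlt)
        rw [htr.1] at hnd
        cases hnd
    · refine ⟨R, M.take (M.length - 1), ?_, hRne, hRdg, ?_⟩
      · rw [hcs, show R ++ M ++ V = R ++ (M ++ V) by simp,
          show R.length + M.length - 1 = R.length + (M.length - 1) by omega,
          List.take_append, List.take_of_length_le (by omega),
          show R.length + (M.length - 1) - R.length = M.length - 1 by omega,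
          List.take_append_of_le_length (by omega)]
      · intro c hc
        exact hMnd c (List.mem_of_mem_take hc)
  · rintro ⟨i, hi, htr, hmin, hbad⟩
    have h1i : 1 ≤ i := trig_pos htr
    have hxnd : PySem.Chars.isdigit (cs.getD (i - 1) ' ') = false := prev_not_dg hi htr hmin
    have hlenL : (cs.take (i - 1)).length = i - 1 := by
      rw [List.length_take]; omega
    obtain ⟨R', T', hRT, hRne, hRdg, hTnd⟩ := hbad
    have hVd : cs.drop (i - 1) = cs.getD (i - 1) ' ' :: cs.drop i := by
      rw [drop_eq_getD_cons (by omega), show i - 1 + 1 = i by omega]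
    have hcs : cs = R' ++ (T' ++ cs.getD (i - 1) ' ' :: cs.drop i) := by
      conv_lhs => rw [← List.take_append_drop (i - 1) cs]
      rw [hRT, hVd]
      simp
    set W := T' ++ cs.getD (i - 1) ' ' :: cs.drop i with hW
    have hWhead : ∀ b, W.head? = some b → PySem.Chars.isdigit b = false := by
      intro b hb
      rw [hW] at hb
      cases hT : T' with
      | nil => rw [hT] at hb; simp at hb; rw [← hb]; exact hxnd
      | cons u r =>
        rw [hT] at hb; simp at hb
        rw [← hb]
        exact hTnd u (by rw [hT]; simp)
    obtain ⟨htk, hdw⟩ := while_split (p := PySem.Chars.isdigit) hRdg hWhead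
    rw [← hcs] at htk hdw
    have hdig_i : PySem.Chars.isdigit (cs.getD i ' ') = true := htr.1
    have hDrop : cs.drop i ≠ [] := by
      rw [drop_eq_getD_cons hi]
      simp
    obtain ⟨htk2, hdw2⟩ := while_split (p := fun c => ! PySem.Chars.isdigit c)
      (R := T' ++ [cs.getD (i - 1) ' ']) (W := cs.drop i)
      (by
        intro c hc
        rcases List.mem_append.mp hc with h | h
        · simp [hTnd c h]
        · simp only [List.mem_singleton] at h
          subst h
          show (! PySem.Chars.isdigit (cs.getD (i - 1) ' ')) = true
          rw [hxnd]
          rfl)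
      (by
        intro b hb
        rw [drop_eq_getD_cons hi] at hb
        simp at hb
        rw [← hb]
        simpa using hdig_i)
    have hWassoc : W = (T' ++ [cs.getD (i - 1) ' ']) ++ cs.drop i := by
      rw [hW]; simp
    rw [← hWassoc] at htk2 hdw2
    refine ⟨by rw [htk]; exact hRne, by rw [hdw, hdw2]; exact hDrop, ?_⟩
    rw [hdw, htk2]
    have h1lt : i - 1 < cs.length := by omega
    have htakei : cs.take i = R' ++ (T' ++ [cs.getD (i - 1) ' ']) := by
      have h2 := List.take_succ_eq_append_getElem h1lt
      rw [show (i - 1) + 1 = i from by omega] at h2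
      rw [h2, hRT, getD_of_getElem h1lt]
      simp
    have hd := htr.2
    rw [← depthAt_take (le_refl i), htakei] at hd
    generalize hM : T' ++ [cs.getD (i - 1) ' '] = M at hd ⊢
    have hilen : i = R'.length + M.length := by
      have hl := congrArg List.length hRT
      rw [hlenL] at hl
      have hl2 := congrArg List.length hM
      simp at hl hl2
      omega
    have hb := bal_prefix (R := R') (M := M) (V := ([] : List Char)) hRdg
    rw [List.append_nil] at hb
    rw [hilen, hb] at hd
    exact hd

-- the common decomposition data at the first trigger
theorem pair_decomp {cs : List Char} {i la lb : Nat}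
    (hn : i + la + lb + 2 ≤ cs.length)
    (hla : 0 < la) (hlb : 0 < lb)
    (hA : ∀ k, i ≤ k → k < i + la → PySem.Chars.isdigit (cs.getD k ' ') = true)
    (hcomma : cs.getD (i + la) ' ' = ',')
    (hB : ∀ k, i + la + 1 ≤ k → k < i + la + 1 + lb → PySem.Chars.isdigit (cs.getD k ' ') = true)
    (hrb : cs.getD (i + la + 1 + lb) ' ' = ']') :
    cs.drop i = (cs.drop i).take la ++ ',' :: ((cs.drop (i + la + 1)).take lb ++ ']' :: cs.drop (i + la + lb + 2)) ∧
    ((cs.drop i).take la).length = la ∧ allDg ((cs.drop i).take la) ∧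
    ((cs.drop (i + la + 1)).take lb).length = lb ∧ allDg ((cs.drop (i + la + 1)).take lb) := by
  have hlen1 : ((cs.drop i).take la).length = la := by
    simp [List.length_take, List.length_drop]; omega
  have hlen2 : ((cs.drop (i + la + 1)).take lb).length = lb := by
    simp [List.length_take, List.length_drop]; omega
  refine ⟨?_, hlen1, ?_, hlen2, ?_⟩
  · have e1 : cs.drop i = (cs.drop i).take la ++ cs.drop (i + la) := by
      rw [← List.drop_drop]
      exact (List.take_append_drop la (cs.drop i)).symm
    have e2 : cs.drop (i + la) = ',' :: cs.drop (i + la + 1) := by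
      rw [drop_eq_getD_cons (by omega), hcomma]
    have e3 : cs.drop (i + la + 1) = (cs.drop (i + la + 1)).take lb ++ cs.drop (i + la + 1 + lb) := by
      have h0 := List.take_append_drop lb (cs.drop (i + la + 1))
      rw [List.drop_drop] at h0
      convert h0.symm using 3 <;> omega
    have e4 : cs.drop (i + la + 1 + lb) = ']' :: cs.drop (i + la + lb + 2) := by
      rw [drop_eq_getD_cons (by omega), hrb, show i + la + 1 + lb + 1 = i + la + lb + 2 by omega]
    rw [e2, e3, e4] at e1
    exact e1
  · intro c hc
    obtain ⟨k, hk, rfl⟩ := List.mem_iff_getElem.mp hc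
    have hkla : k < la := by rw [hlen1] at hk; exact hk
    have hkcs : i + k < cs.length := by omega
    rw [List.getElem_take, List.getElem_drop, ← getD_of_getElem (d := ' ') hkcs]
    exact hA _ (by omega) (by omega)
  · intro c hc
    obtain ⟨k, hk, rfl⟩ := List.mem_iff_getElem.mp hc
    have hklb : k < lb := by rw [hlen2] at hk; exact hk
    have hkcs : i + la + 1 + k < cs.length := by omega
    rw [List.getElem_take, List.getElem_drop, ← getD_of_getElem (d := ' ') hkcs]
    exact hB _ (by omega) (by omega)

-- value of the A port's trigger body under the decomposition
theorem trigBody_eval {cs : List Char} {i la lb : Nat}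
    (hn : i + la + lb + 2 ≤ cs.length)
    (hla : 0 < la) (hlb : 0 < lb)
    (hA : ∀ k, i ≤ k → k < i + la → PySem.Chars.isdigit (cs.getD k ' ') = true)
    (hcomma : cs.getD (i + la) ' ' = ',')
    (hB : ∀ k, i + la + 1 ≤ k → k < i + la + 1 + lb → PySem.Chars.isdigit (cs.getD k ' ') = true)
    (hrb : cs.getD (i + la + 1 + lb) ' ' = ']') :
    trigBody cs i =
      aerBwdGo (cs.take (i - 1)) ((PySem.Int.ofChars? ((cs.drop i).take la)).getD 0)
          (List.range (i - 1)).reverse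
        ++ '0' :: aerFwd [] (cs.drop (i + la + lb + 2))
          ((PySem.Int.ofChars? ((cs.drop (i + la + 1)).take lb)).getD 0) := by
  obtain ⟨hQ, hlenA, hAdg, hlenB, hBdg⟩ := pair_decomp hn hla hlb hA hcomma hB hrb
  set A := (cs.drop i).take la with hAdef
  set B := (cs.drop (i + la + 1)).take lb with hBdef
  set S := cs.drop (i + la + lb + 2) with hSdef
  have hQlen : (cs.drop i).length = cs.length - i := List.length_drop
  have hgetQ : ∀ k, (cs.drop i).getD k ' ' = cs.getD (i + k) ' ' := fun k => getD_drop
  have hsc : PySem.Chars.find (cs.drop i) [','] = (la : Int) := by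
    apply find_singleton_eq (by omega)
    · rw [hgetQ]; exact hcomma
    · intro k hk
      rw [hgetQ]
      exact dg_ne_comma (hA _ (by omega) (by omega))
  have hsep : PySem.Chars.find (cs.drop i) [']'] = ((la + 1 + lb : Nat) : Int) := by
    apply find_singleton_eq (by omega)
    · rw [hgetQ, show i + (la + 1 + lb) = i + la + 1 + lb by omega]; exact hrb
    · intro k hk
      rw [hgetQ]
      rcases Nat.lt_or_ge k la with h | h
      · exact dg_ne_rb (hA _ (by omega) (by omega))
      · rcases Nat.eq_or_lt_of_le h with h2 | h2
        · rw [← h2, hcomma]; decide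
        · exact dg_ne_rb (hB _ (by omega) (by omega))
  unfold trigBody
  rw [hsc, hsep]
  rw [if_neg (by
    simp only [Bool.or_eq_true, decide_eq_true_eq, not_or]
    constructor <;> omega)]
  have htoNat1 : ((la : Int)).toNat = la := Int.toNat_natCast la
  have htoNat2 : (((la + 1 + lb : Nat) : Int)).toNat = la + 1 + lb := Int.toNat_natCast _
  rw [htoNat1, htoNat2]
  have htakeA : (cs.drop i).take la = A := rfl
  have hQ2 : cs.drop i = (A ++ ',' :: B) ++ (']' :: S) := by
    rw [hQ]; simp
  have htakeAB : (cs.drop i).take (la + 1 + lb) = A ++ ',' :: B := by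
    rw [hQ2, List.take_append_of_le_length (by simp [hlenA, hlenB]; omega)]
    exact List.take_of_length_le (by simp [hlenA, hlenB]; omega)
  have hdropS : (cs.drop i).drop (la + 1 + lb + 1) = S := by
    rw [hQ2, drop_append_len (by simp [hlenA, hlenB]; omega)]
    rw [show la + 1 + lb + 1 - (A ++ ',' :: B).length = 1 by simp [hlenA, hlenB]; omega]
    rfl
  have hmidB : ((cs.drop i).take (la + 1 + lb)).drop (la + 1) = B := by
    rw [htakeAB, show A ++ ',' :: B = (A ++ [',']) ++ B by simp]
    rw [drop_append_len (by simp [hlenA])]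
    rw [show la + 1 - (A ++ [',']).length = 0 by simp [hlenA]]
    rfl
  rw [htakeA, hmidB, hdropS]
  have haer0 : ∀ (L : List Char) (v : Int),
      addExplosionResult L v 0 = aerBwdGo L v (List.range L.length).reverse := fun _ _ => rfl
  have haer1 : ∀ (L : List Char) (v : Int), addExplosionResult L v 1 = aerFwd [] L v :=
    fun _ _ => rfl
  rw [haer0, haer1]
  have hlenL : (cs.take (i - 1)).length = i - 1 := by
    rw [List.length_take]; omega
  rw [hlenL]

theorem explodeAltGo_match (cs : List Char) :
    explodeAltGo cs =
      (match findStart (tokenize cs) 0 0 with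
      | none => cs
      | some s =>
        if (decide (s + 3 < (tokenize cs).length) && ((tokenize cs).getD (s + 1) [] == [','])
            && headDg ((tokenize cs).getD (s + 2) []) && ((tokenize cs).getD (s + 3) [] == [']'])) = true then
          PySem.Chars.join [] (addLastTok ((tokenize cs).take (s - 1))
              ((PySem.Int.ofChars? ((tokenize cs).getD s [])).getD 0))
            ++ '0' :: PySem.Chars.join [] (addFirstTok ((tokenize cs).drop (s + 4))
              ((PySem.Int.ofChars? ((tokenize cs).getD (s + 2) [])).getD 0))
        else cs) := rfl

theorem explodeAltGo_none {cs : List Char} (h : findStart (tokenize cs) 0 0 = none) :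
    explodeAltGo cs = cs := by
  rw [explodeAltGo_match, h]

theorem explodeAltGo_some {cs : List Char} {s : Nat} (h : findStart (tokenize cs) 0 0 = some s) :
    explodeAltGo cs =
      (if (decide (s + 3 < (tokenize cs).length) && ((tokenize cs).getD (s + 1) [] == [','])
          && headDg ((tokenize cs).getD (s + 2) []) && ((tokenize cs).getD (s + 3) [] == [']'])) = true then
        PySem.Chars.join [] (addLastTok ((tokenize cs).take (s - 1))
            ((PySem.Int.ofChars? ((tokenize cs).getD s [])).getD 0))
          ++ '0' :: PySem.Chars.join [] (addFirstTok ((tokenize cs).drop (s + 4))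
            ((PySem.Int.ofChars? ((tokenize cs).getD (s + 2) [])).getD 0))
      else cs) := by
  rw [explodeAltGo_match, h]

-- value of the B port under the decomposition (plus minimality of the trigger)
theorem altGo_eval {cs : List Char} {i la lb : Nat}
    (hi : i < cs.length) (htr : trigAt cs i) (hmin : ∀ j < i, ¬ trigAt cs j)
    (hn : i + la + lb + 2 ≤ cs.length)
    (hla : 0 < la) (hlb : 0 < lb)
    (hA : ∀ k, i ≤ k → k < i + la → PySem.Chars.isdigit (cs.getD k ' ') = true)
    (hcomma : cs.getD (i + la) ' ' = ',')
    (hB : ∀ k, i + la + 1 ≤ k → k < i + la + 1 + lb → PySem.Chars.isdigit (cs.getD k ' ') = true)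
    (hrb : cs.getD (i + la + 1 + lb) ' ' = ']') :
    explodeAltGo cs =
      (addLastTok (tokenize (cs.take (i - 1))) ((PySem.Int.ofChars? ((cs.drop i).take la)).getD 0)).flatten
        ++ '0' :: (addFirstTok (tokenize (cs.drop (i + la + lb + 2)))
          ((PySem.Int.ofChars? ((cs.drop (i + la + 1)).take lb)).getD 0)).flatten := by
  obtain ⟨hQ, hlenA, hAdg, hlenB, hBdg⟩ := pair_decomp hn hla hlb hA hcomma hB hrb
  set A := (cs.drop i).take la with hAdef
  set B := (cs.drop (i + la + 1)).take lb with hBdef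
  set S := cs.drop (i + la + lb + 2) with hSdef
  have h1i : 1 ≤ i := trig_pos htr
  have hAne : A ≠ [] := by
    intro hc; rw [hc] at hlenA; simp at hlenA; omega
  have hBne : B ≠ [] := by
    intro hc; rw [hc] at hlenB; simp at hlenB; omega
  -- P = take i cs ends with the non-digit x = cs[i-1]
  have hxnd : PySem.Chars.isdigit (cs.getD (i - 1) ' ') = false := prev_not_dg hi htr hmin
  have hPsplit : cs.take i = cs.take (i - 1) ++ [cs.getD (i - 1) ' '] := by
    have h1 : i - 1 < cs.length := by omega
    have h2 := List.take_succ_eq_append_getElem h1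
    rw [show (i - 1) + 1 = i from by omega] at h2
    rw [h2, getD_of_getElem h1]
  -- tokenize cs
  have htokQ : tokenize (cs.drop i) = A :: [','] :: B :: [']'] :: tokenize S := by
    rw [hQ]
    rw [tokenize_run hAdg hAne (by intro b hb; simp at hb; rw [← hb]; decide)]
    rw [tokenize_cons_ndg (by decide)]
    rw [tokenize_run hBdg hBne (by intro b hb; simp at hb; rw [← hb]; decide)]
    rw [tokenize_cons_ndg (by decide)]
  have hsplitP : tokenize (cs.take i) = tokenize (cs.take (i - 1)) ++ [[cs.getD (i - 1) ' ']] := by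
    rw [hPsplit, tokenize_append (cs.take (i - 1)).length _ _ le_rfl
      (Or.inr (by intro b hb; simp at hb; rw [← hb]; exact hxnd))]
    rw [tokenize_singleton_ndg hxnd]
  have htokcs : tokenize cs = tokenize (cs.take i) ++ (A :: [','] :: B :: [']'] :: tokenize S) := by
    conv_lhs => rw [← List.take_append_drop i cs]
    rw [tokenize_append (cs.take i).length _ _ le_rfl (Or.inl ?_), htokQ]
    intro a ha
    rw [hPsplit, List.getLast?_append_of_ne_nil _ (by simp)] at ha
    simp at ha
    rw [← ha]
    exact hxnd
  -- the found position
  have hnoP : noTrigRel 0 (cs.take i) := by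
    intro j hj hcon
    have hjlen : j < i := by
      have := List.length_take_le i cs; omega
    apply hmin j hjlen
    constructor
    · have := hcon.1
      rwa [getD_take hjlen] at this
    · have := hcon.2
      rwa [depthAt_take (by omega), zero_add] at this
  have hlenP : (cs.take i).length = i := by rw [List.length_take]; omega
  have hdepthP : depthAt (cs.take i) (cs.take i).length = depthAt cs i := by
    rw [hlenP, depthAt_take le_rfl]
  have hfind : findStart (tokenize cs) 0 0 = some (tokenize (cs.take i)).length := by
    rw [htokcs, findStart_tok (cs.take i).length _ le_rfl _ _ _ hnoP]
    rw [hdepthP]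
    obtain ⟨a0, A', hA0⟩ : ∃ a0 A', A = a0 :: A' := by
      cases hc : A with
      | nil => exact absurd hc hAne
      | cons u r => exact ⟨u, r, rfl⟩
    have ha0 : PySem.Chars.isdigit a0 = true := hAdg a0 (by rw [hA0]; simp)
    rw [hA0]
    simp only [findStart]
    rw [if_neg (by
      intro hc
      rw [show ((a0 :: A' : List Char) == ['[']) = true ↔ (a0 :: A') = ['['] from beq_iff_eq] at hc
      have : a0 = '[' := by injection hc
      exact dg_ne_lb ha0 this)]
    rw [if_neg (by
      intro hc
      rw [show ((a0 :: A' : List Char) == [']']) = true ↔ (a0 :: A') = [']'] from beq_iff_eq] at hc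
      have : a0 = ']' := by injection hc
      exact dg_ne_rb ha0 this)]
    rw [if_pos (by
      simp only [headDg, ha0, Bool.true_and, decide_eq_true_eq]
      rw [zero_add]
      exact htr.2)]
    simp
  -- evaluate explodeAltGo
  rw [explodeAltGo_some hfind]
  set s := (tokenize (cs.take i)).length with hsdef
  have hg0 : (tokenize cs).getD s [] = A := by
    rw [htokcs, getD_append_right (by omega), show s - (tokenize (cs.take i)).length = 0 by omega]
    rfl
  have hg1 : (tokenize cs).getD (s + 1) [] = [','] := by
    rw [htokcs, getD_append_right (by omega), show s + 1 - (tokenize (cs.take i)).length = 1 by omega]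
    rfl
  have hg2 : (tokenize cs).getD (s + 2) [] = B := by
    rw [htokcs, getD_append_right (by omega), show s + 2 - (tokenize (cs.take i)).length = 2 by omega]
    rfl
  have hg3 : (tokenize cs).getD (s + 3) [] = [']'] := by
    rw [htokcs, getD_append_right (by omega), show s + 3 - (tokenize (cs.take i)).length = 3 by omega]
    rfl
  have hlentoks : (tokenize cs).length = s + 4 + (tokenize S).length := by
    rw [htokcs]
    simp only [List.length_append, List.length_cons]
    omega
  rw [if_pos (by
    rw [hg1, hg2, hg3, hlentoks]
    obtain ⟨b0, B', hB0⟩ : ∃ b0 B', B = b0 :: B' := by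
      cases hc : B with
      | nil => exact absurd hc hBne
      | cons u r => exact ⟨u, r, rfl⟩
    have hb0 : PySem.Chars.isdigit b0 = true := hBdg b0 (by rw [hB0]; simp)
    simp [hB0, headDg, hb0]
    omega)]
  rw [hg0, hg2]
  have htake : (tokenize cs).take (s - 1) = tokenize (cs.take (i - 1)) := by
    rw [htokcs, List.take_append_of_le_length (by omega)]
    rw [hsdef, hsplitP]
    rw [List.take_append_of_le_length (by simp)]
    exact List.take_of_length_le (by simp)
  have hdrop : (tokenize cs).drop (s + 4) = tokenize S := by
    rw [htokcs, show tokenize (cs.take i) ++ A :: [','] :: B :: [']'] :: tokenize S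
        = (tokenize (cs.take i) ++ [A, [','], B, [']']]) ++ tokenize S by simp]
    rw [drop_append_len (by simp; omega)]
    rw [show s + 4 - (tokenize (cs.take i) ++ [A, [','], B, [']']]).length = 0 by simp; omega]
    rfl
  rw [htake, hdrop]
  rw [join_nil_flatten, join_nil_flatten]

-- the precondition read back at an index: the zipIdx membership form unpacked
theorem pre_index {number : String} (h : Pre_explode number) :
    ∀ i < number.toList.length,
      (trigAt number.toList i ∧ ∀ j < i, ¬ trigAt number.toList j) →
      ∃ la < number.toList.length, ∃ lb < number.toList.length,
        0 < la ∧ 0 < lb ∧ i + la + lb + 2 ≤ number.toList.length ∧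
        (∀ k, i ≤ k → k < i + la → PySem.Chars.isdigit (number.toList.getD k ' ') = true) ∧
        number.toList.getD (i + la) ' ' = ',' ∧
        (∀ k, i + la + 1 ≤ k → k < i + la + 1 + lb →
          PySem.Chars.isdigit (number.toList.getD k ' ') = true) ∧
        number.toList.getD (i + la + 1 + lb) ' ' = ']' ∧
        rightOk (number.toList.drop (i + la + lb + 2)) := by
  intro i hi htm
  obtain ⟨htr, hmin⟩ := htm
  have hmem : (number.toList[i], i) ∈ number.toList.zipIdx := by
    rw [List.mk_mem_zipIdx_iff_le_and_getElem?_sub]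
    exact ⟨Nat.zero_le _, by simp [List.getElem?_eq_getElem hi]⟩
  exact h _ hmem ⟨by rw [← getD_of_getElem hi]; exact htr.1, htr.2, hmin⟩

-- ===== VERDICT (by name: the statement is the Claim_ definition above) =====
theorem explode_spec : Claim_unchanged_explode := by
  intro number hdom hpre hnd
  show explode number = explode_alt number
  unfold explode explode_alt
  congr 1
  replace hpre := pre_index hpre
  rw [D_iff] at hnd
  generalize number.toList = cs at hpre hnd ⊢
  by_cases hex : ∃ j, j < cs.length ∧ trigAt cs j
  · -- a trigger exists: take the least one
    classical
    set i := Nat.find hex with hidef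
    obtain ⟨hi, htr⟩ := Nat.find_spec hex
    have hmin : ∀ j < i, ¬ trigAt cs j := by
      intro j hj hc
      have hjt := Nat.find_min hex hj
      exact hjt ⟨by omega, hc⟩
    obtain ⟨la, hla1, lb, hlb1, hla, hlb, hn, hA, hcomma, hB, hrb, hrok⟩ :=
      hpre i hi ⟨htr, hmin⟩
    have hAside : explodeGo cs cs 0 0 = trigBody cs i := by
      have h0 := explodeGo_trig hi htr cs 0 (by simp) (by omega) (fun j h1 h2 => hmin j h2)
      rwa [depthAt_zero] at h0
    rw [hAside, trigBody_eval hn hla hlb hA hcomma hB hrb,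
      altGo_eval hi htr hmin hn hla hlb hA hcomma hB hrb]
    have hlenL : (cs.take (i - 1)).length = i - 1 := by
      rw [List.length_take]; omega
    have hnbad : ¬ badL (cs.take (i - 1)) := by
      intro hb
      exact hnd ⟨i, hi, htr, hmin, hb⟩
    have hL := leftAdd_eq hnbad ((PySem.Int.ofChars? ((cs.drop i).take la)).getD 0)
    rw [hlenL] at hL
    have hR := rightAdd_eq (cs.drop (i + la + lb + 2)).length _ le_rfl
      ((PySem.Int.ofChars? ((cs.drop (i + la + 1)).take lb)).getD 0) hrok
    rw [hL, hR]
  · -- no trigger: both sides return the input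
    push_neg at hex
    have hno : ∀ j, j < cs.length → ¬ trigAt cs j := fun j hj hc => hex j hj hc
    have hAside : explodeGo cs cs 0 0 = cs := by
      have h0 := explodeGo_step (cs := cs) cs 0 (by simp) (by omega) (fun j h1 h2 => hno j h2)
      rwa [depthAt_zero] at h0
    rw [hAside]
    have hfind : findStart (tokenize cs) 0 0 = none := by
      have h0 := findStart_tok cs.length cs le_rfl [] 0 0 ?no
      case no =>
        intro j hj hcon
        exact hno j hj ⟨hcon.1, by rw [← zero_add (depthAt cs j)]; exact hcon.2⟩
      rw [List.append_nil] at h0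
      rw [h0]
      rfl
    rw [explodeAltGo_none hfind]

theorem explode_changed : Claim_changed_explode := by
  unfold Claim_changed_explode
  refine ⟨by decide, by decide, by decide, ?_, ?_, ?_⟩
  · show String.ofList _ = _
    rw [show explodeGo pvDiffWitness_explode.toList pvDiffWitness_explode.toList 0 0 =
      pvDiffWitnessOut_explode.1.toList from by decide]
    exact String.ofList_toList
  · show String.ofList _ = _
    rw [show explodeAltGo pvDiffWitness_explode.toList =
      pvDiffWitnessOut_explode.2.toList from by decide]
    exact String.ofList_toList
  · exact fun h => absurd (congrArg String.toList h) (by decide)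

theorem explode_tight : Claim_exact_explode := by
  intro number hdom hpre hD heq
  have heql : explodeGo number.toList number.toList 0 0 = explodeAltGo number.toList := by
    have h0 := congrArg String.toList heq
    rwa [show (explode number).toList = explodeGo number.toList number.toList 0 0 from by
        unfold explode; rw [String.toList_ofList],
      show (explode_alt number).toList = explodeAltGo number.toList from by
        unfold explode_alt; rw [String.toList_ofList]] at h0
  replace hpre := pre_index hpre
  rw [D_iff] at hD
  generalize number.toList = cs at hpre hD heql
  obtain ⟨i, hi, htr, hmin, hbad⟩ := hD
  obtain ⟨la, hla1, lb, hlb1, hla, hlb, hn, hA, hcomma, hB, hrb, hrok⟩ :=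
    hpre i hi ⟨htr, hmin⟩
  have hlenL : (cs.take (i - 1)).length = i - 1 := by
    rw [List.length_take]; omega
  obtain ⟨R, T, hRT, hRne, hRdg, hTnd⟩ := hbad
  have hAside : explodeGo cs cs 0 0 = trigBody cs i := by
    have h0 := explodeGo_trig hi htr cs 0 (by simp) (by omega) (fun j h1 h2 => hmin j h2)
    rwa [depthAt_zero] at h0
  set lv := (PySem.Int.ofChars? ((cs.drop i).take la)).getD 0 with hlv
  set rv := (PySem.Int.ofChars? ((cs.drop (i + la + 1)).take lb)).getD 0 with hrv
  have hTB := trigBody_eval hn hla hlb hA hcomma hB hrb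
  rw [← hlv, ← hrv] at hTB
  have hRTlen : (i - 1) = R.length + T.length := by
    rw [← hlenL, hRT]; simp
  have hLeval : aerBwdGo (cs.take (i - 1)) lv (List.range (i - 1)).reverse =
      ((R ++ T) ++ PySem.Int.toChars ((PySem.Int.ofChars? R).getD 0 + lv)) ++ T := by
    rw [hRT, hRTlen, aerBwd_skip T.length R.length (by
      intro k h1 h2
      rw [getD_append_right h1]
      have hk : k - R.length < T.length := by omega
      rw [getD_of_getElem hk]
      exact hTnd _ (List.getElem_mem hk))]
    rw [aerBwd_fire_bad hRdg hRne lv]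
  have hBval : (addLastTok (tokenize (cs.take (i - 1))) lv).flatten =
      PySem.Int.toChars ((PySem.Int.ofChars? R).getD 0 + lv) ++ T := by
    rw [hRT]
    exact addLast_bad hRdg hRne hTnd lv
  have hAlt := altGo_eval hi htr hmin hn hla hlb hA hcomma hB hrb
  rw [← hlv, ← hrv] at hAlt
  have hRside := rightAdd_eq (cs.drop (i + la + lb + 2)).length _ le_rfl rv hrok
  rw [hAside, hTB, hAlt, hLeval, hBval, hRside] at heql
  have hlen := congrArg List.length heql
  simp only [List.length_append, List.length_cons] at hlen
  have hRlen : 0 < R.length := by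
    cases R with
    | nil => exact absurd rfl hRne
    | cons a b => simp
  omega
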